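-- pv_equiv track=rewrite | github.com/YonaraMirelly/Estudos-Python | Estudos_Rodrigo/1va/lobo_mal.py | resolver_fazenda
-- ===== SOURCE A (Python) =====
-- def busca(fazenda, visitado, x, y, R, C):
--     # Movimentos possíveis (cima, baixo, esquerda, direita)
--     movimentos = [(-1, 0), (1, 0), (0, -1), (0, 1)]
--
--     pilha = [(x, y)] # começa com a célula inicial
--     # número de ovelhas e lobos na região
--     ovelhas = 0
--     lobos = 0
--     # atualizar a quantidade de ovelhas e lobos
--     if fazenda[x][y] == 'k':
--         ovelhas += 1
--     elif fazenda[x][y] == 'v':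
--         lobos += 1
--
--     while pilha: # enquanto houver células na pilha
--         cx, cy = pilha.pop() # remover célula
--         for dx, dy in movimentos:
--             nx, ny = cx + dx, cy + dy # verificar células vizinhas
--             if 0 <= nx < R and 0 <= ny < C and not visitado[nx][ny] and fazenda[nx][ny] != '#':
--                 visitado[nx][ny] = True
--                 pilha+= [(nx, ny)]
--                 if fazenda[nx][ny] == 'k': # atualizar quando necessário
--                     ovelhas += 1
--                 elif fazenda[nx][ny] == 'v':
--                     lobos += 1
--
--     return ovelhas, lobos # número de ovelhas e lobos encontrados na região
--
-- def resolver_fazenda(fazenda, R, C): # número de ovelhas e lobos sobreviventes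
--     visitado = [[False] * C for _ in range(R)] # matriz pra acompanhar as células já visitadas
--     # lobos e ovelhas já sobreviventes
--     ovelhas_total = 0
--     lobos_total = 0
--
--     for i in range(R):
--         for j in range(C):
--             if not visitado[i][j] and fazenda[i][j] != '#': # para cada célula não visitada, realizar uma busca
--                 visitado[i][j] = True
--                 ovelhas, lobos = busca(fazenda, visitado, i, j, R, C)
--                 if ovelhas > lobos: # atualizar os contadores
--                     ovelhas_total += ovelhas
--                 else:
--                     lobos_total += lobos
--
--     return ovelhas_total, lobos_total
-- ===== SOURCE B (Python) =====
-- def resolver_fazenda(fazenda, R, C):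
--     # Union-find over cell ids i*C+j: one pass unions each free cell with its
--     # free right/down neighbour, one linear pass resolves every root (parents
--     # always point to smaller ids), then per-root counts are aggregated.
--     n = max(R, 0) * max(C, 0)
--     parent = list(range(n))
--
--     def find(a):
--         while parent[a] != a:
--             a = parent[a]
--         return a
--
--     def union(a, b):
--         ra, rb = find(a), find(b)
--         if ra < rb:
--             parent[rb] = ra
--         elif rb < ra:
--             parent[ra] = rb
--
--     for i in range(R):
--         for j in range(C):
--             if fazenda[i][j] == '#':
--                 continue
--             if j + 1 < C and fazenda[i][j + 1] != '#':
--                 union(i * C + j, i * C + j + 1)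
--             if i + 1 < R and fazenda[i + 1][j] != '#':
--                 union(i * C + j, (i + 1) * C + j)
--
--     # parent[x] <= x, so one increasing pass resolves all roots
--     root = list(range(n))
--     for x in range(n):
--         root[x] = root[parent[x]]
--
--     sheep = {}
--     wolves = {}
--     for i in range(R):
--         for j in range(C):
--             cell = fazenda[i][j]
--             if cell == '#':
--                 continue
--             r = root[i * C + j]
--             sheep[r] = sheep.get(r, 0) + (1 if cell == 'k' else 0)
--             wolves[r] = wolves.get(r, 0) + (1 if cell == 'v' else 0)
--
--     ovelhas_total = 0
--     lobos_total = 0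
--     for r, s in sheep.items():
--         w = wolves[r]
--         if s > w:
--             ovelhas_total += s
--         else:
--             lobos_total += w
--     return ovelhas_total, lobos_total
-- ===== Notes on version B (the rewrite author's own statement) =====
-- stated objective: alternative
-- what changed: Replaces A's per-region DFS flood fill (explicit stack plus visited matrix, deciding each region's contribution as soon as its search finishes) by a disjoint-set union-find over cell ids: one pass unions each free cell with its free right/down neighbours (roots always point to smaller ids), one linear pass resolves every cell's root, a scan accumulates per-root sheep and wolf counts in two dicts, and a final pass over the roots adds each component's surviving count.
import Mathlib
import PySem

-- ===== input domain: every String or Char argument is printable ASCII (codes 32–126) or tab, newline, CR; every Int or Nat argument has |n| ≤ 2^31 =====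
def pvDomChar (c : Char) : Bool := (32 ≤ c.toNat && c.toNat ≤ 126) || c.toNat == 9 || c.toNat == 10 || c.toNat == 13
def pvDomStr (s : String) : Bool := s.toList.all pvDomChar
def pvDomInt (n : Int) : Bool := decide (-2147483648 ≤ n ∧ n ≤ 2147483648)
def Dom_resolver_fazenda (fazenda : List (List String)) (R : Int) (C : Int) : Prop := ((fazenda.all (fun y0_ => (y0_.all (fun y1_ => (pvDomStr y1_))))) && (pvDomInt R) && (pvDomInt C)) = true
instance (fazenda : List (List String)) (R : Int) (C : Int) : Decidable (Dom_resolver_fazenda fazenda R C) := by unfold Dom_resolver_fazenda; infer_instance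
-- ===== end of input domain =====

-- B replaces A's per-region DFS flood fill (stack + visited matrix) by a disjoint-set
-- union-find over cell ids: union free right/down neighbours, resolve roots in one linear
-- pass, aggregate per-root sheep/wolf counts in dicts, then total the surviving counts.

-- ===== PORT A =====

-- fazenda[x][y]; exact for the non-negative in-range accesses the guards and Pre_ guarantee
def pvAt (f : List (List String)) (x y : Int) : String :=
  PySem.List.pyGetD (PySem.List.pyGetD f x []) y ""

-- visitado[x][y]
def pvVisGet (v : List (List Bool)) (x y : Int) : Bool :=
  PySem.List.pyGetD (PySem.List.pyGetD v x []) y false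

-- visitado[x][y] = True
def pvVisSet (v : List (List Bool)) (x y : Int) : List (List Bool) :=
  PySem.List.pySetD v x (PySem.List.pySetD (PySem.List.pyGetD v x []) y true)

def pvMov : List (Int × Int) := [(-1, 0), (1, 0), (0, -1), (0, 1)]

-- body of busca's for-loop over movimentos (state: pilha stored top-first, visitado, ovelhas, lobos)
def buscaStep (f : List (List String)) (R C cx cy : Int)
    (st : List (Int × Int) × List (List Bool) × Int × Int) (d : Int × Int) :
    List (Int × Int) × List (List Bool) × Int × Int :=
  let nx := cx + d.1
  let ny := cy + d.2
  if 0 ≤ nx ∧ nx < R ∧ 0 ≤ ny ∧ ny < C ∧ pvVisGet st.2.1 nx ny = false ∧ pvAt f nx ny ≠ "#" then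
    let c := pvAt f nx ny
    ((nx, ny) :: st.1, pvVisSet st.2.1 nx ny,
     if c = "k" then st.2.2.1 + 1 else st.2.2.1,
     if c = "k" then st.2.2.2 else if c = "v" then st.2.2.2 + 1 else st.2.2.2)
  else st

-- busca's while-loop; fuel R*C+1 is proved sufficient (each iteration strictly decreases
-- unvisited-cells + stack-size)
def buscaLoop (f : List (List String)) (R C : Int) :
    Nat → List (Int × Int) → List (List Bool) → Int → Int → List (List Bool) × Int × Int
  | 0, _, vis, o, l => (vis, o, l)
  | _ + 1, [], vis, o, l => (vis, o, l)
  | fuel + 1, (cx, cy) :: rest, vis, o, l =>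
    let st := pvMov.foldl (buscaStep f R C cx cy) (rest, vis, o, l)
    buscaLoop f R C fuel st.1 st.2.1 st.2.2.1 st.2.2.2

def busca (f : List (List String)) (vis : List (List Bool)) (x y R C : Int) :
    List (List Bool) × Int × Int :=
  let o : Int := if pvAt f x y = "k" then 1 else 0
  let l : Int := if pvAt f x y = "k" then 0 else if pvAt f x y = "v" then 1 else 0
  buscaLoop f R C (R.toNat * C.toNat + 1) [(x, y)] vis o l

def resolver_fazenda (fazenda : List (List String)) (R : Int) (C : Int) : Int × Int :=
  let vis0 : List (List Bool) := (PySem.List.pyRange 0 R 1).map (fun _ => List.replicate C.toNat false)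
  let fin := (PySem.List.pyRange 0 R 1).foldl (fun st i =>
    (PySem.List.pyRange 0 C 1).foldl (fun (st : List (List Bool) × Int × Int) j =>
      if pvVisGet st.1 i j = false ∧ pvAt fazenda i j ≠ "#" then
        let vis1 := pvVisSet st.1 i j
        let r := busca fazenda vis1 i j R C
        if r.2.1 > r.2.2 then (r.1, st.2.1 + r.2.1, st.2.2)
        else (r.1, st.2.1, st.2.2 + r.2.2)
      else st) st) (vis0, 0, 0)
  (fin.2.1, fin.2.2)

-- ===== PORT B =====

-- find(a): while parent[a] != a: a = parent[a]  (out-of-range read defaults to a itself,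
-- never reached on the ids B uses; fuel parent.length+1 is proved sufficient since
-- parents always point to smaller ids)
def ufFind (par : List Int) : Nat → Int → Int
  | 0, a => a
  | fuel + 1, a =>
    let p := PySem.List.pyGetD par a a
    if p = a then a else ufFind par fuel p

def ufRoot (par : List Int) (a : Int) : Int := ufFind par (par.length + 1) a

-- union(a, b): the larger root is pointed at the smaller one
def ufUnion (par : List Int) (a b : Int) : List Int :=
  let ra := ufRoot par a
  let rb := ufRoot par b
  if ra < rb then PySem.List.pySetD par rb ra
  else if rb < ra then PySem.List.pySetD par ra rb
  else par

-- pass 1: union every free cell with its free right and down neighbours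
def ufUnions (f : List (List String)) (R C : Int) : List Int :=
  (PySem.List.pyRange 0 R 1).foldl (fun par i =>
    (PySem.List.pyRange 0 C 1).foldl (fun (par : List Int) j =>
      if pvAt f i j = "#" then par
      else
        let par1 := if j + 1 < C ∧ pvAt f i (j + 1) ≠ "#" then
          ufUnion par (i * C + j) (i * C + j + 1) else par
        if i + 1 < R ∧ pvAt f (i + 1) j ≠ "#" then
          ufUnion par1 (i * C + j) ((i + 1) * C + j) else par1) par)
    (PySem.List.pyRange 0 (max R 0 * max C 0) 1)

-- pass 2: root[x] = root[parent[x]] for increasing x (parent[x] <= x)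
def ufResolve (par : List Int) (n : Int) : List Int :=
  (PySem.List.pyRange 0 n 1).foldl (fun root x =>
    PySem.List.pySetD root x (PySem.List.pyGetD root (PySem.List.pyGetD par x 0) 0))
    (PySem.List.pyRange 0 n 1)

def resolver_fazenda_alt (fazenda : List (List String)) (R : Int) (C : Int) : Int × Int :=
  let par := ufUnions fazenda R C
  let root := ufResolve par (max R 0 * max C 0)
  -- pass 3: per-root sheep and wolf counts
  let dicts := (PySem.List.pyRange 0 R 1).foldl (fun (st : PySem.Dict Int Int × PySem.Dict Int Int) i =>
    (PySem.List.pyRange 0 C 1).foldl (fun (st : PySem.Dict Int Int × PySem.Dict Int Int) j =>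
      let cell := pvAt fazenda i j
      if cell = "#" then st
      else
        let r := PySem.List.pyGetD root (i * C + j) 0
        (st.1.insert r (st.1.getD r 0 + (if cell = "k" then 1 else 0)),
         st.2.insert r (st.2.getD r 0 + (if cell = "v" then 1 else 0)))) st)
    (PySem.Dict.empty, PySem.Dict.empty)
  -- pass 4: total the surviving counts per root
  dicts.1.items.foldl (fun (acc : Int × Int) (p : Int × Int) =>
    let w := dicts.2.getD p.1 0
    if p.2 > w then (acc.1 + p.2, acc.2) else (acc.1, acc.2 + w)) (0, 0)

-- ===== PRECONDITION & SPEC =====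

-- Pre_ excludes exactly the inputs where Python A raises IndexError: with positive R and C,
-- the grid must have at least R rows whose first R rows each have at least C columns.
def Pre_resolver_fazenda (fazenda : List (List String)) (R : Int) (C : Int) : Prop :=
  R ≤ 0 ∨ C ≤ 0 ∨ (R ≤ (fazenda.length : Int) ∧
    ∀ row ∈ fazenda.take R.toNat, C ≤ (row.length : Int))
instance (fazenda : List (List String)) (R : Int) (C : Int) :
    Decidable (Pre_resolver_fazenda fazenda R C) := by unfold Pre_resolver_fazenda; infer_instance

def pvWitness_resolver_fazenda : List (List String) × Int × Int :=
  ([["k", "v"], [".", "#"]], 2, 2)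

def Spec_resolver_fazenda (fazenda : List (List String)) (R : Int) (C : Int) (out : Int × Int) : Prop := out = resolver_fazenda_alt fazenda R C
instance (fazenda : List (List String)) (R : Int) (C : Int) (out : Int × Int) : Decidable (Spec_resolver_fazenda fazenda R C out) := by unfold Spec_resolver_fazenda; infer_instance

-- ===== CLAIM (what is proved, stated in full; the proofs are below) =====
def Claim_equal_resolver_fazenda : Prop := ∀ (fazenda : List (List String)) (R : Int) (C : Int), Dom_resolver_fazenda fazenda R C → Pre_resolver_fazenda fazenda R C → Spec_resolver_fazenda fazenda R C (resolver_fazenda fazenda R C)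

-- ===== LEMMAS AND PROOFS =====

-- ---------- the reference flood fill (proof-side only): B of a previous development ----------

def pvNbrs (x y : Int) : List (Int × Int) := [(x - 1, y), (x + 1, y), (x, y - 1), (x, y + 1)]

def pvBfsStep (f : List (List String)) (R C : Int)
    (st : PySem.Set (Int × Int) × List (Int × Int)) (n : Int × Int) :
    PySem.Set (Int × Int) × List (Int × Int) :=
  if 0 ≤ n.1 ∧ n.1 < R ∧ 0 ≤ n.2 ∧ n.2 < C ∧ ¬ n ∈ st.1 ∧ pvAt f n.1 n.2 ≠ "#" then
    (PySem.Set.add st.1 n, st.2 ++ [n])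
  else st

def pvBfsLoop (f : List (List String)) (R C : Int) :
    Nat → List (Int × Int) → PySem.Set (Int × Int) → Int → Int →
      PySem.Set (Int × Int) × Int × Int
  | 0, _, seen, s, w => (seen, s, w)
  | _ + 1, [], seen, s, w => (seen, s, w)
  | fuel + 1, (x, y) :: rest, seen, s, w =>
    let cell := pvAt f x y
    let s' := if cell = "k" then s + 1 else s
    let w' := if cell = "k" then w else if cell = "v" then w + 1 else w
    let st := (pvNbrs x y).foldl (pvBfsStep f R C) (seen, [])
    pvBfsLoop f R C fuel (rest ++ st.2) st.1 s' w'

def pvBfs (fazenda : List (List String)) (R : Int) (C : Int) : Int × Int :=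
  let fin := (PySem.List.pyRange 0 R 1).foldl (fun st i =>
    (PySem.List.pyRange 0 C 1).foldl (fun (st : PySem.Set (Int × Int) × List (Int × Int)) j =>
      if (i, j) ∈ st.1 ∨ pvAt fazenda i j = "#" then st
      else
        let seen1 := PySem.Set.add st.1 (i, j)
        let r := pvBfsLoop fazenda R C (R.toNat * C.toNat + 1) [(i, j)] seen1 0 0
        (r.1, st.2 ++ [(r.2.1, r.2.2)])) st) (PySem.Set.empty, [])
  let comps := fin.2
  (comps.foldl (fun a p => if p.1 > p.2 then a + p.1 else a) 0,
   comps.foldl (fun a p => if p.1 ≤ p.2 then a + p.2 else a) 0)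

-- ---------- spec-level notions (proof-only) ----------

abbrev pvInR (R C : Int) (p : Int × Int) : Prop := 0 ≤ p.1 ∧ p.1 < R ∧ 0 ≤ p.2 ∧ p.2 < C

abbrev pvFree (f : List (List String)) (R C : Int) (p : Int × Int) : Prop :=
  pvInR R C p ∧ pvAt f p.1 p.2 ≠ "#"

def pvStepRel (f : List (List String)) (R C : Int) (p q : Int × Int) : Prop :=
  pvFree f R C p ∧ pvFree f R C q ∧ q ∈ pvNbrs p.1 p.2

def pvReach (f : List (List String)) (R C : Int) : Int × Int → Int × Int → Prop :=
  Relation.ReflTransGen (pvStepRel f R C)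

def pvCells (R C : Int) : List (Int × Int) :=
  PySem.List.pyRange 0 R 1 ×ˢ PySem.List.pyRange 0 C 1

def mA (v : List (List Bool)) (p : Int × Int) : Bool := pvVisGet v p.1 p.2

def pvShape (R C : Int) (v : List (List Bool)) : Prop :=
  v.length = R.toNat ∧ ∀ row ∈ v, row.length = C.toNat

lemma mem_pvCells {R C : Int} {p : Int × Int} : p ∈ pvCells R C ↔ pvInR R C p := by
  obtain ⟨a, b⟩ := p
  simp only [pvCells, SProd.sprod, List.pair_mem_product, PySem.List.mem_pyRange_one, pvInR]
  tauto

lemma nodup_pvCells (R C : Int) : (pvCells R C).Nodup :=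
  List.Nodup.product (PySem.List.nodup_pyRange_one 0 R) (PySem.List.nodup_pyRange_one 0 C)

-- ---------- counting lemmas ----------

lemma pv_countP_flip {α : Type} {L : List α} (hL : L.Nodup) {p : α} (hp : p ∈ L)
    {m m' : α → Bool} (hsame : ∀ q ∈ L, q ≠ p → m' q = m q)
    (h1 : m p = false) (h2 : m' p = true) :
    L.countP m' = L.countP m + 1 := by
  induction L with
  | nil => cases hp
  | cons a L ih =>
    rw [List.countP_cons, List.countP_cons]
    by_cases hap : a = p
    · subst hap
      have hLp : a ∉ L := (List.nodup_cons.1 hL).1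
      have hc : L.countP m' = L.countP m :=
        List.countP_congr (fun q hq => by
          rw [hsame q (List.mem_cons_of_mem _ hq) (fun h => hLp (h ▸ hq))])
      rw [hc, h1, h2]
      simp
    · have hp' : p ∈ L := by
        rcases List.mem_cons.1 hp with h | h
        · exact absurd h.symm hap
        · exact h
      rw [ih (List.nodup_cons.1 hL).2 hp'
        (fun q hq hq' => hsame q (List.mem_cons_of_mem _ hq) hq'),
        hsame a List.mem_cons_self hap]
      omega

lemma pv_countP_stay {α : Type} (L : List α) (p : α)
    {m m' : α → Bool} (hsame : ∀ q ∈ L, q ≠ p → m' q = m q) (hp : m' p = m p) :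
    L.countP m' = L.countP m :=
  List.countP_congr (fun x hx => by
    by_cases hxp : x = p
    · subst hxp; rw [hp]
    · rw [hsame x hx hxp])

lemma pv_countP_split {α : Type} (L : List α) (m0 m1 m2 ch : α → Bool)
    (h01 : ∀ p ∈ L, m0 p = true → m1 p = true)
    (h12 : ∀ p ∈ L, m1 p = true → m2 p = true) :
    L.countP (fun p => m2 p && !m0 p && ch p) =
      L.countP (fun p => m2 p && !m1 p && ch p) + L.countP (fun p => m1 p && !m0 p && ch p) := by
  induction L with
  | nil => simp
  | cons a L ih =>
    have h0a := h01 a List.mem_cons_self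
    have h1a := h12 a List.mem_cons_self
    rw [List.countP_cons, List.countP_cons, List.countP_cons,
      ih (fun p hp => h01 p (List.mem_cons_of_mem _ hp))
         (fun p hp => h12 p (List.mem_cons_of_mem _ hp))]
    cases hm0 : m0 a <;> cases hm1 : m1 a <;> cases hm2 : m2 a <;> cases hch : ch a <;>
      simp_all <;> omega

lemma pv_countP_memList {α : Type} [DecidableEq α] :
    ∀ (new : List α) (L : List α), L.Nodup → new.Nodup → (∀ p ∈ new, p ∈ L) →
    ∀ (ch : α → Bool),
      L.countP (fun p => decide (p ∈ new) && ch p) = new.countP ch := by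
  intro new
  induction new with
  | nil => intro L _ _ _ ch; simp
  | cons q new ih =>
    intro L hL hnew hsub ch
    have hq : q ∈ L := hsub q List.mem_cons_self
    have hqn : q ∉ new := (List.nodup_cons.1 hnew).1
    have hrest : L.countP (fun p => decide (p ∈ new) && ch p) = new.countP ch :=
      ih L hL (List.nodup_cons.1 hnew).2 (fun p hp => hsub p (List.mem_cons_of_mem _ hp)) ch
    by_cases hc : ch q = true
    · have hflip := pv_countP_flip hL hq
        (m := fun p => decide (p ∈ new) && ch p)
        (m' := fun p => decide (p ∈ q :: new) && ch p)
        (fun r _ hrq => by simp [List.mem_cons, hrq])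
        (by simp [hqn]) (by simp [hc])
      rw [hflip, hrest, List.countP_cons]
      simp [hc]
    · have hstay := pv_countP_stay L q
        (m := fun p => decide (p ∈ new) && ch p)
        (m' := fun p => decide (p ∈ q :: new) && ch p)
        (fun r _ hrq => by simp [List.mem_cons, hrq])
        (by simp [hc])
      rw [hstay, hrest, List.countP_cons]
      simp [hc]

-- ---------- matrix access lemmas ----------

lemma pvShape_set {R C : Int} {v : List (List Bool)} {x y : Int}
    (h : pvShape R C v) (hxy : pvInR R C (x, y)) : pvShape R C (pvVisSet v x y) := by
  obtain ⟨hlen, hrow⟩ := h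
  obtain ⟨hx0, hxR, hy0, hyC⟩ := hxy
  unfold pvVisSet
  rw [PySem.List.pySetD_of_nonneg _ _ hx0, PySem.List.pySetD_of_nonneg _ _ hy0,
    PySem.List.pyGetD_of_nonneg _ _ hx0]
  constructor
  · simpa using hlen
  · intro row hr
    rcases List.mem_or_eq_of_mem_set hr with hmem | rfl
    · exact hrow _ hmem
    · have hxlt : x.toNat < v.length := by omega
      have : v.getD x.toNat [] = v[x.toNat] := List.getD_eq_getElem _ _ hxlt
      rw [List.length_set, this]
      exact hrow _ (List.getElem_mem _)

lemma pv_getset (v : List (List Bool)) (i j a b : Nat)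
    (hi : i < v.length) (hj : j < v[i].length) :
    ((v.set i ((v.getD i []).set j true)).getD a []).getD b false =
      if a = i ∧ b = j then true else (v.getD a []).getD b false := by
  have hvi : v.getD i [] = v[i] := List.getD_eq_getElem _ _ hi
  rw [List.getD_eq_getElem?_getD (l := v.set i ((v.getD i []).set j true)),
    List.getElem?_set]
  by_cases hai : i = a
  · subst hai
    rw [if_pos rfl, if_pos hi]
    simp only [Option.getD_some]
    rw [List.getD_eq_getElem?_getD (l := (v.getD i []).set j true), List.getElem?_set]
    by_cases hbj : j = b
    · subst hbj
      rw [if_pos rfl, if_pos (by rw [hvi]; exact hj)]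
      simp
    · rw [if_neg hbj, if_neg (by intro h; exact hbj h.2.symm)]
      rw [List.getD_eq_getElem?_getD (l := v.getD i [])]
  · rw [if_neg hai, if_neg (by intro h; exact hai h.1.symm)]
    rw [List.getD_eq_getElem?_getD (l := v)]

lemma mA_set {R C : Int} {v : List (List Bool)} {x y : Int}
    (hsh : pvShape R C v) (hxy : pvInR R C (x, y)) {p : Int × Int} (hp : pvInR R C p) :
    mA (pvVisSet v x y) p = (mA v p || decide (p = (x, y))) := by
  obtain ⟨hlen, hrow⟩ := hsh
  obtain ⟨hx0, hxR, hy0, hyC⟩ := hxy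
  obtain ⟨a, b⟩ := p
  obtain ⟨ha0, haR, hb0, hbC⟩ := hp
  simp only at hx0 hxR hy0 hyC ha0 haR hb0 hbC
  have hxlt : x.toNat < v.length := by omega
  have hrowlen : v[x.toNat].length = C.toNat := hrow _ (List.getElem_mem _)
  have hylt : y.toNat < v[x.toNat].length := by omega
  simp only [mA, pvVisGet, pvVisSet]
  rw [PySem.List.pySetD_of_nonneg _ _ hx0, PySem.List.pySetD_of_nonneg _ _ hy0,
    PySem.List.pyGetD_of_nonneg _ _ hx0,
    PySem.List.pyGetD_of_nonneg _ _ ha0, PySem.List.pyGetD_of_nonneg _ _ ha0,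
    PySem.List.pyGetD_of_nonneg _ _ hb0, PySem.List.pyGetD_of_nonneg _ _ hb0]
  rw [pv_getset v x.toNat y.toNat a.toNat b.toNat hxlt hylt]
  by_cases hax : (a, b) = (x, y)
  · obtain ⟨h1, h2⟩ := Prod.mk.injEq .. ▸ hax
    rw [if_pos ⟨by omega, by omega⟩]
    simp [hax]
  · have : ¬ (a.toNat = x.toNat ∧ b.toNat = y.toNat) := by
      intro ⟨h1, h2⟩
      exact hax (by
        have : a = x := by omega
        have : b = y := by omega
        simp_all)
    rw [if_neg this]
    simp [hax]

lemma pyGetD_mem_or {α : Type} (xs : List α) (i : Int) (d : α) :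
    PySem.List.pyGetD xs i d ∈ xs ∨ PySem.List.pyGetD xs i d = d := by
  simp only [PySem.List.pyGetD, PySem.List.pyGet?]
  cases h : (PySem.List.pyIdx? xs.length i).bind (fun k => xs[k]?) with
  | none => simp
  | some a =>
    left
    obtain ⟨k, _, hk⟩ := Option.bind_eq_some_iff.1 h
    simpa using List.mem_of_getElem? hk

lemma mA_init (R C : Int) (p : Int × Int) :
    mA ((PySem.List.pyRange 0 R 1).map (fun _ => List.replicate C.toNat false)) p = false := by
  simp only [mA, pvVisGet]
  rcases pyGetD_mem_or ((PySem.List.pyRange 0 R 1).map (fun _ => List.replicate C.toNat false)) p.1 [] with hmem | hd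
  · obtain ⟨w, hw, heq⟩ := List.mem_map.1 hmem
    rw [← heq]
    rcases pyGetD_mem_or (List.replicate C.toNat false) p.2 false with hm | hd2
    · exact List.eq_of_mem_replicate hm
    · exact hd2
  · rw [hd]
    rcases pyGetD_mem_or ([] : List Bool) p.2 false with hm | hd2
    · cases hm
    · exact hd2

lemma pvShape_init (R C : Int) :
    pvShape R C ((PySem.List.pyRange 0 R 1).map (fun _ => List.replicate C.toNat false)) := by
  constructor
  · rw [List.length_map]
    simp [PySem.List.length_pyRange_one]
  · intro row hr
    obtain ⟨_, _, rfl⟩ := List.mem_map.1 hr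
    simp


-- ---------- neighbour lemmas ----------

lemma nbr_of_mov {x y : Int} {d : Int × Int} (hd : d ∈ pvMov) :
    (x + d.1, y + d.2) ∈ pvNbrs x y := by
  simp only [pvMov, List.mem_cons, List.not_mem_nil, or_false] at hd
  rcases hd with rfl | rfl | rfl | rfl <;>
    simp [pvNbrs] <;> omega

lemma mov_of_nbr {x y : Int} {q : Int × Int} (hq : q ∈ pvNbrs x y) :
    ∃ d ∈ pvMov, q = (x + d.1, y + d.2) := by
  simp only [pvNbrs, List.mem_cons, List.not_mem_nil, or_false] at hq
  rcases hq with rfl | rfl | rfl | rfl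
  · exact ⟨(-1, 0), by simp [pvMov], by simp; omega⟩
  · exact ⟨(1, 0), by simp [pvMov], by simp⟩
  · exact ⟨(0, -1), by simp [pvMov], by simp; omega⟩
  · exact ⟨(0, 1), by simp [pvMov], by simp⟩

def pvCnt (R C : Int) (m : Int × Int → Bool) : Nat := (pvCells R C).countP m

def isK (f : List (List String)) (p : Int × Int) : Bool := decide (pvAt f p.1 p.2 = "k")
def isV (f : List (List String)) (p : Int × Int) : Bool := decide (pvAt f p.1 p.2 = "v")

lemma pvCnt_zero (R C : Int) (m ch : Int × Int → Bool) :
    pvCnt R C (fun p => m p && !m p && ch p) = 0 := by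
  unfold pvCnt
  rw [List.countP_congr (q := fun _ => false) (fun x _ => by cases h : m x <;> simp_all)]
  simp

-- ---------- invariant of busca's inner for-loop (A side) ----------

def MIA (f : List (List String)) (R C : Int) (visb : List (List Bool)) (ob lb : Int)
    (rest : List (Int × Int)) (c : Int × Int)
    (st : List (Int × Int) × List (List Bool) × Int × Int) : Prop :=
  pvShape R C st.2.1 ∧
  (∀ p, pvInR R C p → mA visb p = true → mA st.2.1 p = true) ∧
  (∀ p, pvInR R C p → mA st.2.1 p = true →
      mA visb p = true ∨ (p ∈ st.1 ∧ pvStepRel f R C c p)) ∧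
  (∀ p ∈ rest, p ∈ st.1) ∧
  (∀ p ∈ st.1, p ∈ rest ∨ pvStepRel f R C c p) ∧
  (∀ p ∈ st.1, pvInR R C p ∧ mA st.2.1 p = true ∧ pvFree f R C p) ∧
  (∀ p, pvInR R C p → mA st.2.1 p = true → pvFree f R C p) ∧
  st.2.2.1 = ob + (pvCnt R C (fun p => mA st.2.1 p && !mA visb p && isK f p) : Int) ∧
  st.2.2.2 = lb + (pvCnt R C (fun p => mA st.2.1 p && !mA visb p && isV f p) : Int) ∧
  pvCnt R C (fun p => !mA st.2.1 p) + st.1.length =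
    pvCnt R C (fun p => !mA visb p) + rest.length

lemma MIA_step {f : List (List String)} {R C : Int} {visb : List (List Bool)} {ob lb : Int}
    {rest : List (Int × Int)} {c : Int × Int} (hcfree : pvFree f R C c)
    {st : List (Int × Int) × List (List Bool) × Int × Int}
    (hst : MIA f R C visb ob lb rest c st) {d : Int × Int} (hd : d ∈ pvMov) :
    MIA f R C visb ob lb rest c (buscaStep f R C c.1 c.2 st d) ∧
    (∀ p, pvInR R C p → mA st.2.1 p = true →
        mA (buscaStep f R C c.1 c.2 st d).2.1 p = true) ∧
    (pvFree f R C (c.1 + d.1, c.2 + d.2) →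
        mA (buscaStep f R C c.1 c.2 st d).2.1 (c.1 + d.1, c.2 + d.2) = true) := by
  obtain ⟨hsh, hmono, hnew, hrest, hpil, hpilF, hfree, ho, hl, hmeas⟩ := hst
  by_cases hg : 0 ≤ c.1 + d.1 ∧ c.1 + d.1 < R ∧ 0 ≤ c.2 + d.2 ∧ c.2 + d.2 < C ∧
      pvVisGet st.2.1 (c.1 + d.1) (c.2 + d.2) = false ∧ pvAt f (c.1 + d.1) (c.2 + d.2) ≠ "#"
  · -- the neighbour is marked, pushed and counted
    obtain ⟨h1, h2, h3, h4, h5, h6⟩ := hg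
    set n : Int × Int := (c.1 + d.1, c.2 + d.2) with hn
    have hnin : pvInR R C n := ⟨h1, h2, h3, h4⟩
    have hnfree : pvFree f R C n := ⟨hnin, h6⟩
    have hnA : mA st.2.1 n = false := h5
    have hnb : mA visb n = false := by
      cases h : mA visb n
      · rfl
      · rw [hmono n hnin h] at hnA; cases hnA
    have hstep : pvStepRel f R C c n := ⟨hcfree, hnfree, nbr_of_mov hd⟩
    have hunf : buscaStep f R C c.1 c.2 st d =
        ((n :: st.1), pvVisSet st.2.1 n.1 n.2,
         if pvAt f n.1 n.2 = "k" then st.2.2.1 + 1 else st.2.2.1,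
         if pvAt f n.1 n.2 = "k" then st.2.2.2
         else if pvAt f n.1 n.2 = "v" then st.2.2.2 + 1 else st.2.2.2) := by
      unfold buscaStep
      rw [if_pos ⟨h1, h2, h3, h4, h5, h6⟩]
    rw [hunf]
    have hset : ∀ p, pvInR R C p →
        mA (pvVisSet st.2.1 n.1 n.2) p = (mA st.2.1 p || decide (p = n)) := by
      intro p hp
      exact mA_set hsh hnin hp
    have hmono' : ∀ p, pvInR R C p → mA st.2.1 p = true →
        mA (pvVisSet st.2.1 n.1 n.2) p = true := by
      intro p hp h
      rw [hset p hp, h]; rfl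
    refine ⟨⟨pvShape_set hsh hnin, ?_, ?_, ?_, ?_, ?_, ?_, ?_, ?_, ?_⟩, ?_, ?_⟩
    · intro p hp h; exact hmono' p hp (hmono p hp h)
    · intro p hp h
      rw [hset p hp] at h
      rcases Bool.or_eq_true_iff.1 h with h' | h'
      · rcases hnew p hp h' with h'' | ⟨h1', h2'⟩
        · exact Or.inl h''
        · exact Or.inr ⟨List.mem_cons_of_mem _ h1', h2'⟩
      · have : p = n := of_decide_eq_true h'
        subst this
        exact Or.inr ⟨List.mem_cons_self, hstep⟩
    · intro p hp; exact List.mem_cons_of_mem _ (hrest p hp)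
    · intro p hp
      rcases List.mem_cons.1 hp with rfl | hp'
      · exact Or.inr hstep
      · exact hpil p hp'
    · intro p hp
      rcases List.mem_cons.1 hp with rfl | hp'
      · exact ⟨hnin, by rw [hset n hnin]; simp, hnfree⟩
      · obtain ⟨hin, hm, hf⟩ := hpilF p hp'
        exact ⟨hin, hmono' p hin hm, hf⟩
    · intro p hp h
      rw [hset p hp] at h
      rcases Bool.or_eq_true_iff.1 h with h' | h'
      · exact hfree p hp h'
      · have : p = n := of_decide_eq_true h'
        subst this
        exact hnfree
    · -- ovelhas count
      dsimp only
      by_cases hk : pvAt f n.1 n.2 = "k"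
      · rw [if_pos hk, ho]
        have hc : pvCnt R C (fun p => mA (pvVisSet st.2.1 n.1 n.2) p && !mA visb p && isK f p) =
            pvCnt R C (fun p => mA st.2.1 p && !mA visb p && isK f p) + 1 := by
          unfold pvCnt
          refine pv_countP_flip (nodup_pvCells R C) (mem_pvCells.2 hnin) ?_ ?_ ?_
          · intro q hq hqn
            rw [hset q (mem_pvCells.1 hq)]
            simp [hqn]
          · simp [hnA]
          · rw [hset n hnin]
            simp [hnb, isK, hk]
        rw [hc]
        push_cast
        ring
      · rw [if_neg hk, ho]
        have hc : pvCnt R C (fun p => mA (pvVisSet st.2.1 n.1 n.2) p && !mA visb p && isK f p) =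
            pvCnt R C (fun p => mA st.2.1 p && !mA visb p && isK f p) := by
          unfold pvCnt
          refine pv_countP_stay _ n ?_ ?_
          · intro q hq hqn
            rw [hset q (mem_pvCells.1 hq)]
            simp [hqn]
          · rw [hset n hnin]
            simp [isK, hk, hnA]
        rw [hc]
    · -- lobos count
      dsimp only
      by_cases hk : pvAt f n.1 n.2 = "k"
      · rw [if_pos hk, hl]
        have hc : pvCnt R C (fun p => mA (pvVisSet st.2.1 n.1 n.2) p && !mA visb p && isV f p) =
            pvCnt R C (fun p => mA st.2.1 p && !mA visb p && isV f p) := by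
          unfold pvCnt
          refine pv_countP_stay _ n ?_ ?_
          · intro q hq hqn
            rw [hset q (mem_pvCells.1 hq)]
            simp [hqn]
          · rw [hset n hnin]
            simp [isV, hk, hnA]
        rw [hc]
      · rw [if_neg hk]
        by_cases hv : pvAt f n.1 n.2 = "v"
        · rw [if_pos hv, hl]
          have hc : pvCnt R C (fun p => mA (pvVisSet st.2.1 n.1 n.2) p && !mA visb p && isV f p) =
              pvCnt R C (fun p => mA st.2.1 p && !mA visb p && isV f p) + 1 := by
            unfold pvCnt
            refine pv_countP_flip (nodup_pvCells R C) (mem_pvCells.2 hnin) ?_ ?_ ?_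
            · intro q hq hqn
              rw [hset q (mem_pvCells.1 hq)]
              simp [hqn]
            · simp [hnA]
            · rw [hset n hnin]
              simp [hnb, isV, hv]
          rw [hc]
          push_cast
          ring
        · rw [if_neg hv, hl]
          have hc : pvCnt R C (fun p => mA (pvVisSet st.2.1 n.1 n.2) p && !mA visb p && isV f p) =
              pvCnt R C (fun p => mA st.2.1 p && !mA visb p && isV f p) := by
            unfold pvCnt
            refine pv_countP_stay _ n ?_ ?_
            · intro q hq hqn
              rw [hset q (mem_pvCells.1 hq)]
              simp [hqn]
            · rw [hset n hnin]
              simp [isV, hv, hnA]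
          rw [hc]
    · -- measure
      dsimp only
      have hc : pvCnt R C (fun p => !mA st.2.1 p) =
          pvCnt R C (fun p => !mA (pvVisSet st.2.1 n.1 n.2) p) + 1 := by
        unfold pvCnt
        refine pv_countP_flip (nodup_pvCells R C) (mem_pvCells.2 hnin) ?_ ?_ ?_
        · intro q hq hqn
          rw [hset q (mem_pvCells.1 hq)]
          simp [hqn]
        · rw [hset n hnin]
          simp
        · simp [hnA]
      simp only [List.length_cons]
      omega
    · intro p hp h; exact hmono' p hp h
    · intro _
      rw [hset n hnin]
      simp
  · -- nothing happens
    have hunf : buscaStep f R C c.1 c.2 st d = st := by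
      unfold buscaStep
      rw [if_neg hg]
    rw [hunf]
    refine ⟨⟨hsh, hmono, hnew, hrest, hpil, hpilF, hfree, ho, hl, hmeas⟩, ?_, ?_⟩
    · intro p _ h; exact h
    · intro hf
      cases h : mA st.2.1 (c.1 + d.1, c.2 + d.2)
      · exfalso
        apply hg
        obtain ⟨⟨k1, k2, k3, k4⟩, k5⟩ := hf
        exact ⟨k1, k2, k3, k4, h, k5⟩
      · rfl

lemma MIA_fold {f : List (List String)} {R C : Int} {visb : List (List Bool)} {ob lb : Int}
    {rest : List (Int × Int)} {c : Int × Int} (hcfree : pvFree f R C c) :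
    ∀ (ds : List (Int × Int)), (∀ d ∈ ds, d ∈ pvMov) →
    ∀ (st : List (Int × Int) × List (List Bool) × Int × Int),
      MIA f R C visb ob lb rest c st →
      MIA f R C visb ob lb rest c (ds.foldl (buscaStep f R C c.1 c.2) st) ∧
      (∀ p, pvInR R C p → mA st.2.1 p = true →
          mA (ds.foldl (buscaStep f R C c.1 c.2) st).2.1 p = true) ∧
      (∀ d ∈ ds, pvFree f R C (c.1 + d.1, c.2 + d.2) →
          mA (ds.foldl (buscaStep f R C c.1 c.2) st).2.1 (c.1 + d.1, c.2 + d.2) = true) := by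
  intro ds
  induction ds with
  | nil =>
    intro _ st hst
    exact ⟨hst, fun p _ h => h, by simp⟩
  | cons d ds ih =>
    intro hds st hst
    have hdm : d ∈ pvMov := hds d List.mem_cons_self
    obtain ⟨hst1, hmono1, hmark1⟩ := MIA_step hcfree hst hdm
    obtain ⟨hst2, hmono2, hmark2⟩ :=
      ih (fun e he => hds e (List.mem_cons_of_mem _ he)) _ hst1
    rw [List.foldl_cons]
    refine ⟨hst2, ?_, ?_⟩
    · intro p hp h
      exact hmono2 p hp (hmono1 p hp h)
    · intro e he hef
      rcases List.mem_cons.1 he with rfl | he'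
      · have hin : pvInR R C (c.1 + e.1, c.2 + e.2) := hef.1
        exact hmono2 _ hin (hmark1 hef)
      · exact hmark2 e he' hef

lemma buscaLoop_spec (f : List (List String)) (R C : Int) :
    ∀ (fuel : Nat) (pilha : List (Int × Int)) (vis : List (List Bool)) (o l : Int),
    pvShape R C vis →
    (∀ p ∈ pilha, pvInR R C p ∧ mA vis p = true ∧ pvFree f R C p) →
    (∀ p, pvInR R C p → mA vis p = true → pvFree f R C p) →
    (∀ p, pvInR R C p → mA vis p = true →
        p ∈ pilha ∨ ∀ q ∈ pvNbrs p.1 p.2, pvFree f R C q → mA vis q = true) →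
    pvCnt R C (fun p => !mA vis p) + pilha.length ≤ fuel →
    pvShape R C (buscaLoop f R C fuel pilha vis o l).1 ∧
    (∀ p, pvInR R C p → mA vis p = true → mA (buscaLoop f R C fuel pilha vis o l).1 p = true) ∧
    (∀ p, pvInR R C p → mA (buscaLoop f R C fuel pilha vis o l).1 p = true →
        mA vis p = true ∨ ∃ s ∈ pilha, pvReach f R C s p) ∧
    (∀ p, pvInR R C p → mA (buscaLoop f R C fuel pilha vis o l).1 p = true → pvFree f R C p) ∧
    (∀ p, pvInR R C p → mA (buscaLoop f R C fuel pilha vis o l).1 p = true →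
        ∀ q ∈ pvNbrs p.1 p.2, pvFree f R C q →
          mA (buscaLoop f R C fuel pilha vis o l).1 q = true) ∧
    (buscaLoop f R C fuel pilha vis o l).2.1 =
      o + (pvCnt R C (fun p => mA (buscaLoop f R C fuel pilha vis o l).1 p && !mA vis p && isK f p) : Int) ∧
    (buscaLoop f R C fuel pilha vis o l).2.2 =
      l + (pvCnt R C (fun p => mA (buscaLoop f R C fuel pilha vis o l).1 p && !mA vis p && isV f p) : Int) := by
  intro fuel
  induction fuel with
  | zero =>
    intro pilha vis o l hsh hpil hfree hclosed hfuel
    have hnil : pilha = [] := List.eq_nil_of_length_eq_zero (by omega)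
    subst hnil
    simp only [buscaLoop]
    refine ⟨hsh, fun p _ h => h, fun p _ h => Or.inl h, hfree, ?_, ?_, ?_⟩
    · intro p hp h q hq hqf
      rcases hclosed p hp h with h' | h'
      · cases h'
      · exact h' q hq hqf
    · rw [pvCnt_zero]; simp
    · rw [pvCnt_zero]; simp
  | succ fuel ihf =>
    intro pilha vis o l hsh hpil hfree hclosed hfuel
    match pilha with
    | [] =>
      simp only [buscaLoop]
      refine ⟨hsh, fun p _ h => h, fun p _ h => Or.inl h, hfree, ?_, ?_, ?_⟩
      · intro p hp h q hq hqf
        rcases hclosed p hp h with h' | h'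
        · cases h'
        · exact h' q hq hqf
      · rw [pvCnt_zero]; simp
      · rw [pvCnt_zero]; simp
    | (cx, cy) :: rest =>
      have hc := hpil (cx, cy) List.mem_cons_self
      have hcfree : pvFree f R C (cx, cy) := hc.2.2
      -- initial inner-loop invariant
      have hst0 : MIA f R C vis o l rest (cx, cy) (rest, vis, o, l) := by
        refine ⟨hsh, fun p _ h => h, fun p _ h => Or.inl h, fun p hp => hp,
          fun p hp => Or.inl hp, ?_, hfree, ?_, ?_, rfl⟩
        · intro p hp
          obtain ⟨h1, h2, h3⟩ := hpil p (List.mem_cons_of_mem _ hp)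
          exact ⟨h1, h2, h3⟩
        · rw [pvCnt_zero]; simp
        · rw [pvCnt_zero]; simp
      obtain ⟨hstF, hmonoF, hmarkF⟩ :=
        MIA_fold hcfree pvMov (fun d hd => hd) _ hst0
      set st' := pvMov.foldl (buscaStep f R C cx cy) (rest, vis, o, l) with hst'
      obtain ⟨sh', mono', new', rest', pil', pilF', free', ho', hl', meas'⟩ := hstF
      have hrun : buscaLoop f R C (fuel + 1) ((cx, cy) :: rest) vis o l =
          buscaLoop f R C fuel st'.1 st'.2.1 st'.2.2.1 st'.2.2.2 := by
        conv_lhs => rw [buscaLoop]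
      rw [hrun]
      have hfuel' : pvCnt R C (fun p => !mA st'.2.1 p) + st'.1.length ≤ fuel := by
        simp only [List.length_cons] at hfuel
        omega
      have hclosed' : ∀ p, pvInR R C p → mA st'.2.1 p = true →
          p ∈ st'.1 ∨ ∀ q ∈ pvNbrs p.1 p.2, pvFree f R C q → mA st'.2.1 q = true := by
        intro p hp h
        rcases new' p hp h with hv | ⟨hin, _⟩
        · rcases hclosed p hp hv with hmem | hcl
          · rcases List.mem_cons.1 hmem with rfl | hmem'
            · right
              intro q hq hqf
              obtain ⟨d, hd, rfl⟩ := mov_of_nbr hq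
              exact hmarkF d hd hqf
            · exact Or.inl (rest' p hmem')
          · right
            intro q hq hqf
            exact mono' q hqf.1 (hcl q hq hqf)
        · exact Or.inl hin
      obtain ⟨ih1, ih2, ih3, ih4, ih5, ih6, ih7⟩ :=
        ihf st'.1 st'.2.1 st'.2.2.1 st'.2.2.2 sh' pilF' free' hclosed' hfuel'
      set res := buscaLoop f R C fuel st'.1 st'.2.1 st'.2.2.1 st'.2.2.2 with hres
      refine ⟨ih1, ?_, ?_, ih4, ih5, ?_, ?_⟩
      · intro p hp h
        exact ih2 p hp (mono' p hp h)
      · intro p hp h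
        rcases ih3 p hp h with h' | ⟨s, hs, hreach⟩
        · rcases new' p hp h' with hv | ⟨_, hstep⟩
          · exact Or.inl hv
          · exact Or.inr ⟨(cx, cy), List.mem_cons_self, Relation.ReflTransGen.single hstep⟩
        · rcases pil' s hs with hsr | hstep
          · exact Or.inr ⟨s, List.mem_cons_of_mem _ hsr, hreach⟩
          · exact Or.inr ⟨(cx, cy), List.mem_cons_self, Relation.ReflTransGen.head hstep hreach⟩
      · rw [ih6, ho']
        have hsplit := pv_countP_split (pvCells R C)
          (fun p => mA vis p) (fun p => mA st'.2.1 p)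
          (fun p => mA res.1 p)
          (fun p => isK f p)
          (fun p hp => mono' p (mem_pvCells.1 hp))
          (fun p hp => ih2 p (mem_pvCells.1 hp))
        unfold pvCnt
        rw [hsplit]
        push_cast
        ring
      · rw [ih7, hl']
        have hsplit := pv_countP_split (pvCells R C)
          (fun p => mA vis p) (fun p => mA st'.2.1 p)
          (fun p => mA res.1 p)
          (fun p => isV f p)
          (fun p hp => mono' p (mem_pvCells.1 hp))
          (fun p hp => ih2 p (mem_pvCells.1 hp))
        unfold pvCnt
        rw [hsplit]
        push_cast
        ring

-- ---------- invariant of the reference BFS inner for-loop ----------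

def mB (s : PySem.Set (Int × Int)) (p : Int × Int) : Bool := decide (p ∈ s)

lemma mB_true {s : PySem.Set (Int × Int)} {p : Int × Int} : mB s p = true ↔ p ∈ s := by
  simp [mB]

lemma mB_false {s : PySem.Set (Int × Int)} {p : Int × Int} : mB s p = false ↔ ¬ p ∈ s := by
  simp [mB]

lemma pv_countP_memB {α : Type} [DecidableEq α] (new L : List α) (hL : L.Nodup)
    (hnew : new.Nodup) (hsub : ∀ p ∈ new, p ∈ L) (mem : α → Bool)
    (hmem : ∀ p, mem p = true ↔ p ∈ new) (ch : α → Bool) :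
    L.countP (fun p => mem p && ch p) = new.countP ch := by
  rw [List.countP_congr (q := fun p => decide (p ∈ new) && ch p)
    (fun x _ => by simp [hmem])]
  exact pv_countP_memList new L hL hnew hsub ch

def MIB (f : List (List String)) (R C : Int) (seen0 : PySem.Set (Int × Int)) (c : Int × Int)
    (st : PySem.Set (Int × Int) × List (Int × Int)) : Prop :=
  (∀ p, p ∈ seen0 → p ∈ st.1) ∧
  (∀ p, p ∈ st.1 → p ∈ seen0 ∨ (p ∈ st.2 ∧ pvStepRel f R C c p)) ∧
  (∀ p ∈ st.2, p ∈ st.1 ∧ ¬ p ∈ seen0 ∧ pvFree f R C p ∧ pvStepRel f R C c p) ∧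
  st.2.Nodup ∧
  pvCnt R C (fun p => !mB st.1 p) + st.2.length = pvCnt R C (fun p => !mB seen0 p)

lemma MIB_step {f : List (List String)} {R C : Int} {seen0 : PySem.Set (Int × Int)}
    {c : Int × Int} (hcfree : pvFree f R C c)
    {st : PySem.Set (Int × Int) × List (Int × Int)}
    (hst : MIB f R C seen0 c st) {n : Int × Int} (hn : n ∈ pvNbrs c.1 c.2) :
    MIB f R C seen0 c (pvBfsStep f R C st n) ∧
    (∀ p, p ∈ st.1 → p ∈ (pvBfsStep f R C st n).1) ∧
    (pvFree f R C n → n ∈ (pvBfsStep f R C st n).1) := by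
  obtain ⟨hmono, hnew, hq, hnd, hmeas⟩ := hst
  by_cases hg : 0 ≤ n.1 ∧ n.1 < R ∧ 0 ≤ n.2 ∧ n.2 < C ∧ ¬ n ∈ st.1 ∧ pvAt f n.1 n.2 ≠ "#"
  · obtain ⟨h1, h2, h3, h4, h5, h6⟩ := hg
    have hnin : pvInR R C n := ⟨h1, h2, h3, h4⟩
    have hnfree : pvFree f R C n := ⟨hnin, h6⟩
    have hstep : pvStepRel f R C c n := ⟨hcfree, hnfree, hn⟩
    have hn0 : ¬ n ∈ seen0 := fun h => h5 (hmono n h)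
    have hunf : pvBfsStep f R C st n = (PySem.Set.add st.1 n, st.2 ++ [n]) := by
      unfold pvBfsStep
      rw [if_pos ⟨h1, h2, h3, h4, h5, h6⟩]
    rw [hunf]
    have hmem : ∀ p, p ∈ PySem.Set.add st.1 n ↔ p ∈ st.1 ∨ p = n :=
      fun p => PySem.Set.mem_add st.1 n p
    have hnq : ¬ n ∈ st.2 := fun h => h5 (hq n h).1
    refine ⟨⟨?_, ?_, ?_, ?_, ?_⟩, ?_, ?_⟩
    · intro p hp
      exact (hmem p).2 (Or.inl (hmono p hp))
    · intro p hp
      rcases (hmem p).1 hp with h' | rfl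
      · rcases hnew p h' with h'' | ⟨hq', hs'⟩
        · exact Or.inl h''
        · exact Or.inr ⟨List.mem_append_left _ hq', hs'⟩
      · exact Or.inr ⟨List.mem_append_right _ List.mem_cons_self, hstep⟩
    · intro p hp
      rcases List.mem_append.1 hp with h' | h'
      · obtain ⟨k1, k2, k3, k4⟩ := hq p h'
        exact ⟨(hmem p).2 (Or.inl k1), k2, k3, k4⟩
      · rcases List.mem_cons.1 h' with rfl | h''
        · exact ⟨(hmem p).2 (Or.inr rfl), hn0, hnfree, hstep⟩
        · cases h''
    · rw [List.nodup_append]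
      refine ⟨hnd, List.nodup_singleton _, ?_⟩
      intro a ha b hb
      rw [List.mem_singleton.1 hb]
      exact fun heq => hnq (heq ▸ ha)
    · have hflip : pvCnt R C (fun p => !mB st.1 p) =
          pvCnt R C (fun p => !mB (PySem.Set.add st.1 n) p) + 1 := by
        unfold pvCnt
        refine pv_countP_flip (nodup_pvCells R C) (mem_pvCells.2 hnin) ?_ ?_ ?_
        · intro q hq' hqn
          simp [mB, hmem q, hqn]
        · simp [mB, hmem n]
        · simp [mB, h5]
      rw [List.length_append]
      simp only [List.length_cons, List.length_nil]
      omega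
    · intro p hp
      exact (hmem p).2 (Or.inl hp)
    · intro _
      exact (hmem n).2 (Or.inr rfl)
  · have hunf : pvBfsStep f R C st n = st := by
      unfold pvBfsStep
      rw [if_neg hg]
    rw [hunf]
    refine ⟨⟨hmono, hnew, hq, hnd, hmeas⟩, fun p hp => hp, ?_⟩
    · intro hf
      by_cases hmem : n ∈ st.1
      · exact hmem
      · exfalso
        apply hg
        obtain ⟨⟨k1, k2, k3, k4⟩, k5⟩ := hf
        exact ⟨k1, k2, k3, k4, hmem, k5⟩

lemma MIB_fold {f : List (List String)} {R C : Int} {seen0 : PySem.Set (Int × Int)}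
    {c : Int × Int} (hcfree : pvFree f R C c) :
    ∀ (ds : List (Int × Int)), (∀ q ∈ ds, q ∈ pvNbrs c.1 c.2) →
    ∀ (st : PySem.Set (Int × Int) × List (Int × Int)),
      MIB f R C seen0 c st →
      MIB f R C seen0 c (ds.foldl (pvBfsStep f R C) st) ∧
      (∀ p, p ∈ st.1 → p ∈ (ds.foldl (pvBfsStep f R C) st).1) ∧
      (∀ q ∈ ds, pvFree f R C q → q ∈ (ds.foldl (pvBfsStep f R C) st).1) := by
  intro ds
  induction ds with
  | nil =>
    intro _ st hst
    exact ⟨hst, fun p h => h, by simp⟩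
  | cons d ds ih =>
    intro hds st hst
    obtain ⟨hst1, hmono1, hmark1⟩ := MIB_step hcfree hst (hds d List.mem_cons_self)
    obtain ⟨hst2, hmono2, hmark2⟩ :=
      ih (fun e he => hds e (List.mem_cons_of_mem _ he)) _ hst1
    rw [List.foldl_cons]
    refine ⟨hst2, ?_, ?_⟩
    · intro p h
      exact hmono2 p (hmono1 p h)
    · intro e he hef
      rcases List.mem_cons.1 he with rfl | he'
      · exact hmono2 _ (hmark1 hef)
      · exact hmark2 e he' hef

lemma pvBfsLoop_spec (f : List (List String)) (R C : Int) :
    ∀ (fuel : Nat) (pending : List (Int × Int)) (seen : PySem.Set (Int × Int)) (s w : Int),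
    (∀ p ∈ pending, p ∈ seen ∧ pvFree f R C p) →
    (∀ p, pvInR R C p → p ∈ seen → pvFree f R C p) →
    (∀ p, pvInR R C p → p ∈ seen →
        p ∈ pending ∨ ∀ q ∈ pvNbrs p.1 p.2, pvFree f R C q → q ∈ seen) →
    pvCnt R C (fun p => !mB seen p) + pending.length ≤ fuel →
    (∀ p, p ∈ seen → p ∈ (pvBfsLoop f R C fuel pending seen s w).1) ∧
    (∀ p, p ∈ (pvBfsLoop f R C fuel pending seen s w).1 →
        p ∈ seen ∨ ∃ x ∈ pending, pvReach f R C x p) ∧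
    (∀ p, pvInR R C p → p ∈ (pvBfsLoop f R C fuel pending seen s w).1 → pvFree f R C p) ∧
    (∀ p, pvInR R C p → p ∈ (pvBfsLoop f R C fuel pending seen s w).1 →
        ∀ q ∈ pvNbrs p.1 p.2, pvFree f R C q → q ∈ (pvBfsLoop f R C fuel pending seen s w).1) ∧
    (pvBfsLoop f R C fuel pending seen s w).2.1 =
      s + (pending.countP (isK f) : Int) +
        (pvCnt R C (fun p => mB (pvBfsLoop f R C fuel pending seen s w).1 p &&
          !mB seen p && isK f p) : Int) ∧
    (pvBfsLoop f R C fuel pending seen s w).2.2 =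
      w + (pending.countP (isV f) : Int) +
        (pvCnt R C (fun p => mB (pvBfsLoop f R C fuel pending seen s w).1 p &&
          !mB seen p && isV f p) : Int) := by
  intro fuel
  induction fuel with
  | zero =>
    intro pending seen s w hpend hfree hclosed hfuel
    have hnil : pending = [] := List.eq_nil_of_length_eq_zero (by omega)
    subst hnil
    simp only [pvBfsLoop]
    refine ⟨fun p h => h, fun p h => Or.inl h, hfree, ?_, ?_, ?_⟩
    · intro p hp h q hq hqf
      rcases hclosed p hp h with h' | h'
      · cases h'
      · exact h' q hq hqf
    · rw [pvCnt_zero R C (mB seen) (isK f)]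
      simp
    · rw [pvCnt_zero R C (mB seen) (isV f)]
      simp
  | succ fuel ihf =>
    intro pending seen s w hpend hfree hclosed hfuel
    match pending with
    | [] =>
      simp only [pvBfsLoop]
      refine ⟨fun p h => h, fun p h => Or.inl h, hfree, ?_, ?_, ?_⟩
      · intro p hp h q hq hqf
        rcases hclosed p hp h with h' | h'
        · cases h'
        · exact h' q hq hqf
      · rw [pvCnt_zero R C (mB seen) (isK f)]
        simp
      · rw [pvCnt_zero R C (mB seen) (isV f)]
        simp
    | (x, y) :: rest =>
      obtain ⟨hcseen, hcfree⟩ := hpend (x, y) List.mem_cons_self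
      have hst0 : MIB f R C seen (x, y) (seen, []) := by
        refine ⟨fun p h => h, fun p h => Or.inl h, ?_, List.nodup_nil, by simp⟩
        · intro p hp
          cases hp
      obtain ⟨hstF, hmonoF, hmarkF⟩ :=
        MIB_fold hcfree (pvNbrs x y) (fun q hq => hq) _ hst0
      set st' := (pvNbrs x y).foldl (pvBfsStep f R C) (seen, ([] : List (Int × Int))) with hst'
      obtain ⟨mono', new', qf', qnd', meas'⟩ := hstF
      have hrun : pvBfsLoop f R C (fuel + 1) ((x, y) :: rest) seen s w =
          pvBfsLoop f R C fuel (rest ++ st'.2) st'.1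
            (if pvAt f x y = "k" then s + 1 else s)
            (if pvAt f x y = "k" then w else if pvAt f x y = "v" then w + 1 else w) := by
        conv_lhs => rw [pvBfsLoop]
      rw [hrun]
      have hpend' : ∀ p ∈ rest ++ st'.2, p ∈ st'.1 ∧ pvFree f R C p := by
        intro p hp
        rcases List.mem_append.1 hp with h' | h'
        · obtain ⟨k1, k2⟩ := hpend p (List.mem_cons_of_mem _ h')
          exact ⟨mono' p k1, k2⟩
        · obtain ⟨k1, _, k3, _⟩ := qf' p h'
          exact ⟨k1, k3⟩
      have hfree' : ∀ p, pvInR R C p → p ∈ st'.1 → pvFree f R C p := by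
        intro p hp h
        rcases new' p h with h' | ⟨_, hs⟩
        · exact hfree p hp h'
        · exact hs.2.1
      have hclosed' : ∀ p, pvInR R C p → p ∈ st'.1 →
          p ∈ rest ++ st'.2 ∨ ∀ q ∈ pvNbrs p.1 p.2, pvFree f R C q → q ∈ st'.1 := by
        intro p hp h
        rcases new' p h with h' | ⟨hq', _⟩
        · rcases hclosed p hp h' with hmem | hcl
          · rcases List.mem_cons.1 hmem with rfl | hmem'
            · right
              intro q hq hqf
              exact hmarkF q hq hqf
            · exact Or.inl (List.mem_append_left _ hmem')
          · right
            intro q hq hqf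
            exact mono' q (hcl q hq hqf)
        · exact Or.inl (List.mem_append_right _ hq')
      have hfuel' : pvCnt R C (fun p => !mB st'.1 p) + (rest ++ st'.2).length ≤ fuel := by
        rw [List.length_append]
        simp only [List.length_cons] at hfuel
        omega
      obtain ⟨ih1, ih2, ih3, ih4, ih5, ih6⟩ :=
        ihf (rest ++ st'.2) st'.1
          (if pvAt f x y = "k" then s + 1 else s)
          (if pvAt f x y = "k" then w else if pvAt f x y = "v" then w + 1 else w)
          hpend' hfree' hclosed' hfuel'
      set res := pvBfsLoop f R C fuel (rest ++ st'.2) st'.1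
          (if pvAt f x y = "k" then s + 1 else s)
          (if pvAt f x y = "k" then w else if pvAt f x y = "v" then w + 1 else w) with hres
      have hsub : ∀ p ∈ st'.2, p ∈ pvCells R C := by
        intro p hp
        exact mem_pvCells.2 (qf' p hp).2.2.1.1
      have hcntnew : ∀ ch : (Int × Int) → Bool,
          pvCnt R C (fun p => mB st'.1 p && !mB seen p && ch p) = st'.2.countP ch := by
        intro ch
        have hcongr : pvCnt R C (fun p => mB st'.1 p && !mB seen p && ch p) =
            pvCnt R C (fun p => mB st'.2 p && ch p) := by
          unfold pvCnt
          refine List.countP_congr (fun q _ => ?_)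
          simp only [Bool.and_eq_true, mB_true, Bool.not_eq_true', mB_false]
          constructor
          · rintro ⟨⟨h1, h2⟩, h3⟩
            rcases new' q h1 with h' | ⟨h', _⟩
            · exact absurd h' h2
            · exact ⟨h', h3⟩
          · rintro ⟨h1, h2⟩
            obtain ⟨k1, k2, _, _⟩ := qf' q h1
            exact ⟨⟨k1, k2⟩, h2⟩
        rw [hcongr]
        unfold pvCnt
        exact pv_countP_memB st'.2 (pvCells R C) (nodup_pvCells R C) qnd' hsub
          (mB st'.2) (fun p => mB_true) ch
      refine ⟨?_, ?_, ih3, ih4, ?_, ?_⟩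
      · intro p h
        exact ih1 p (mono' p h)
      · intro p h
        rcases ih2 p h with h' | ⟨z, hz, hreach⟩
        · rcases new' p h' with h'' | ⟨_, hstep⟩
          · exact Or.inl h''
          · exact Or.inr ⟨(x, y), List.mem_cons_self, Relation.ReflTransGen.single hstep⟩
        · rcases List.mem_append.1 hz with h'' | h''
          · exact Or.inr ⟨z, List.mem_cons_of_mem _ h'', hreach⟩
          · have hstep := (qf' z h'').2.2.2
            exact Or.inr ⟨(x, y), List.mem_cons_self, Relation.ReflTransGen.head hstep hreach⟩
      · rw [ih5]
        have hsplit := pv_countP_split (pvCells R C)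
          (mB seen) (mB st'.1) (mB res.1) (isK f)
          (fun p _ hp => mB_true.2 (mono' p (mB_true.1 hp)))
          (fun p _ hp => mB_true.2 (ih1 p (mB_true.1 hp)))
        have hK := hcntnew (isK f)
        rw [List.countP_cons, List.countP_append]
        unfold pvCnt at hsplit hK ⊢
        by_cases hk : pvAt f x y = "k"
        · rw [if_pos hk]
          have hik : isK f (x, y) = true := by simp [isK, hk]
          rw [hik]
          push_cast
          rw [hsplit, hK]
          push_cast
          simp
          omega
        · rw [if_neg hk]
          have hik : isK f (x, y) = false := by simp [isK, hk]
          rw [hik]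
          push_cast
          rw [hsplit, hK]
          push_cast
          simp
          omega
      · rw [ih6]
        have hsplit := pv_countP_split (pvCells R C)
          (mB seen) (mB st'.1) (mB res.1) (isV f)
          (fun p _ hp => mB_true.2 (mono' p (mB_true.1 hp)))
          (fun p _ hp => mB_true.2 (ih1 p (mB_true.1 hp)))
        have hV := hcntnew (isV f)
        rw [List.countP_cons, List.countP_append]
        unfold pvCnt at hsplit hV ⊢
        by_cases hk : pvAt f x y = "k"
        · rw [if_pos hk]
          have hiv : isV f (x, y) = false := by simp [isV, hk]
          rw [hiv]
          push_cast
          rw [hsplit, hV]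
          push_cast
          simp
          omega
        · rw [if_neg hk]
          by_cases hv : pvAt f x y = "v"
          · rw [if_pos hv]
            have hiv : isV f (x, y) = true := by simp [isV, hv]
            rw [hiv]
            push_cast
            rw [hsplit, hV]
            push_cast
            simp
            omega
          · rw [if_neg hv]
            have hiv : isV f (x, y) = false := by simp [isV, hv]
            rw [hiv]
            push_cast
            rw [hsplit, hV]
            push_cast
            simp
            omega

-- ---------- outer loop glue (A vs the reference BFS) ----------

lemma bool_eq_of_iff {a b : Bool} (h : a = true ↔ b = true) : a = b := by
  cases a <;> cases b <;> simp_all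

lemma reach_closed {f : List (List String)} {R C : Int} {P : Int × Int → Prop}
    (hcl : ∀ p, pvInR R C p → P p → ∀ q ∈ pvNbrs p.1 p.2, pvFree f R C q → P q)
    {s p : Int × Int} (hreach : pvReach f R C s p) (hs : P s) : P p := by
  induction hreach with
  | refl => exact hs
  | tail hab hbc ih =>
    obtain ⟨hfb, hfc, hmem⟩ := hbc
    exact hcl _ hfb.1 ih _ hmem hfc

lemma len_pvCells (R C : Int) : (pvCells R C).length = R.toNat * C.toNat := by
  simp [pvCells, List.length_product, PySem.List.length_pyRange_one]

def sumS (comps : List (Int × Int)) : Int :=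
  comps.foldl (fun a p => if p.1 > p.2 then a + p.1 else a) 0

def sumW (comps : List (Int × Int)) : Int :=
  comps.foldl (fun a p => if p.1 ≤ p.2 then a + p.2 else a) 0

lemma sumS_append (c : List (Int × Int)) (x : Int × Int) :
    sumS (c ++ [x]) = if x.1 > x.2 then sumS c + x.1 else sumS c := by
  simp [sumS, List.foldl_append]

lemma sumW_append (c : List (Int × Int)) (x : Int × Int) :
    sumW (c ++ [x]) = if x.1 ≤ x.2 then sumW c + x.2 else sumW c := by
  simp [sumW, List.foldl_append]

def pvRel (f : List (List String)) (R C : Int)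
    (sA : List (List Bool) × Int × Int)
    (sB : PySem.Set (Int × Int) × List (Int × Int)) : Prop :=
  pvShape R C sA.1 ∧
  (∀ p, pvInR R C p → (mA sA.1 p = true ↔ p ∈ sB.1)) ∧
  (∀ p, pvInR R C p → mA sA.1 p = true → pvFree f R C p) ∧
  (∀ p, pvInR R C p → mA sA.1 p = true →
      ∀ q ∈ pvNbrs p.1 p.2, pvFree f R C q → mA sA.1 q = true) ∧
  sA.2.1 = sumS sB.2 ∧ sA.2.2 = sumW sB.2

lemma foldl_rel_idx {σ τ : Type} (Rel' : σ → τ → Prop) (fA : σ → Int → σ) (fB : τ → Int → τ) :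
    ∀ (l : List Int), (∀ x ∈ l, ∀ sA sB, Rel' sA sB → Rel' (fA sA x) (fB sB x)) →
    ∀ sA sB, Rel' sA sB → Rel' (l.foldl fA sA) (l.foldl fB sB) := by
  intro l
  induction l with
  | nil => intro _ sA sB h; exact h
  | cons x l ih =>
    intro hstep sA sB h
    rw [List.foldl_cons, List.foldl_cons]
    exact ih (fun y hy => hstep y (List.mem_cons_of_mem _ hy)) _ _
      (hstep x List.mem_cons_self sA sB h)

lemma foldl2_rel {σ τ : Type} (Rel' : σ → τ → Prop)
    (fA : σ → Int → Int → σ) (fB : τ → Int → Int → τ) (l₁ l₂ : List Int)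
    (hstep : ∀ a ∈ l₁, ∀ b ∈ l₂, ∀ sA sB, Rel' sA sB → Rel' (fA sA a b) (fB sB a b)) :
    ∀ sA sB, Rel' sA sB →
    Rel' (l₁.foldl (fun st a => l₂.foldl (fun st b => fA st a b) st) sA)
         (l₁.foldl (fun st a => l₂.foldl (fun st b => fB st a b) st) sB) :=
  foldl_rel_idx Rel' _ _ l₁
    (fun a ha sA sB h =>
      foldl_rel_idx Rel' _ _ l₂ (fun b hb sA' sB' h' => hstep a ha b hb sA' sB' h') sA sB h)

lemma step_rel (f : List (List String)) (R C : Int) (a b : Int)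
    (hab : pvInR R C (a, b))
    (sA : List (List Bool) × Int × Int) (sB : PySem.Set (Int × Int) × List (Int × Int))
    (h : pvRel f R C sA sB) :
    pvRel f R C
      (if pvVisGet sA.1 a b = false ∧ pvAt f a b ≠ "#" then
        if (busca f (pvVisSet sA.1 a b) a b R C).2.1 > (busca f (pvVisSet sA.1 a b) a b R C).2.2 then
          ((busca f (pvVisSet sA.1 a b) a b R C).1, sA.2.1 + (busca f (pvVisSet sA.1 a b) a b R C).2.1, sA.2.2)
        else
          ((busca f (pvVisSet sA.1 a b) a b R C).1, sA.2.1, sA.2.2 + (busca f (pvVisSet sA.1 a b) a b R C).2.2)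
      else sA)
      (if (a, b) ∈ sB.1 ∨ pvAt f a b = "#" then sB
       else
        ((pvBfsLoop f R C (R.toNat * C.toNat + 1) [(a, b)] (PySem.Set.add sB.1 (a, b)) 0 0).1,
          sB.2 ++ [((pvBfsLoop f R C (R.toNat * C.toNat + 1) [(a, b)] (PySem.Set.add sB.1 (a, b)) 0 0).2.1,
                    (pvBfsLoop f R C (R.toNat * C.toNat + 1) [(a, b)] (PySem.Set.add sB.1 (a, b)) 0 0).2.2)])) := by
  obtain ⟨hsh, hiff, hfree, hcl, hS, hW⟩ := h
  by_cases hg : pvVisGet sA.1 a b = false ∧ pvAt f a b ≠ "#"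
  · rw [if_pos hg]
    have hmab : mA sA.1 (a, b) = false := hg.1
    have hnb : ¬ (a, b) ∈ sB.1 := fun hmem => by
      rw [← hiff (a, b) hab] at hmem
      rw [hmem] at hmab
      cases hmab
    have hnotB : ¬ ((a, b) ∈ sB.1 ∨ pvAt f a b = "#") := by
      rintro (hmem | hsharp)
      · exact hnb hmem
      · exact hg.2 hsharp
    rw [if_neg hnotB]
    have habfree : pvFree f R C (a, b) := ⟨hab, hg.2⟩
    set vis1 := pvVisSet sA.1 a b with hvis1
    set seen1 := PySem.Set.add sB.1 (a, b) with hseen1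
    have hsh1 : pvShape R C vis1 := pvShape_set hsh hab
    have hvis1mem : ∀ p, pvInR R C p → mA vis1 p = (mA sA.1 p || decide (p = (a, b))) :=
      fun p hp => mA_set hsh hab hp
    have hseen1mem : ∀ p, p ∈ seen1 ↔ p ∈ sB.1 ∨ p = (a, b) :=
      fun p => PySem.Set.mem_add sB.1 (a, b) p
    have heq1 : ∀ p, pvInR R C p → mA vis1 p = mB seen1 p := by
      intro p hp
      refine bool_eq_of_iff ?_
      rw [hvis1mem p hp, mB_true, hseen1mem p]
      simp only [Bool.or_eq_true, decide_eq_true_eq]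
      rw [hiff p hp]
    have hvis1ab : mA vis1 (a, b) = true := by
      rw [hvis1mem (a, b) hab]
      simp
    have hbusca : busca f vis1 a b R C =
        buscaLoop f R C (R.toNat * C.toNat + 1) [(a, b)] vis1
          (if pvAt f a b = "k" then 1 else 0)
          (if pvAt f a b = "k" then 0 else if pvAt f a b = "v" then 1 else 0) := rfl
    obtain ⟨iA1, iA2, iA3, iA4, iA5, iA6, iA7⟩ :=
      buscaLoop_spec f R C (R.toNat * C.toNat + 1) [(a, b)] vis1
        (if pvAt f a b = "k" then 1 else 0)
        (if pvAt f a b = "k" then 0 else if pvAt f a b = "v" then 1 else 0)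
        hsh1
        (by
          intro p hp
          rcases List.mem_cons.1 hp with rfl | hp'
          · exact ⟨hab, hvis1ab, habfree⟩
          · cases hp')
        (by
          intro p hp hm
          rw [hvis1mem p hp] at hm
          rcases Bool.or_eq_true_iff.1 hm with h' | h'
          · exact hfree p hp h'
          · rw [of_decide_eq_true h']
            exact habfree)
        (by
          intro p hp hm
          rw [hvis1mem p hp] at hm
          rcases Bool.or_eq_true_iff.1 hm with h' | h'
          · right
            intro q hq hqf
            rw [hvis1mem q hqf.1]
            rw [hcl p hp h' q hq hqf]
            rfl
          · left
            rw [of_decide_eq_true h']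
            exact List.mem_cons_self)
        (by
          have := List.countP_le_length
            (p := fun p => !mA vis1 p) (l := pvCells R C)
          unfold pvCnt
          rw [← len_pvCells R C]
          simp only [List.length_cons, List.length_nil]
          omega)
    set rA := buscaLoop f R C (R.toNat * C.toNat + 1) [(a, b)] vis1
        (if pvAt f a b = "k" then 1 else 0)
        (if pvAt f a b = "k" then 0 else if pvAt f a b = "v" then 1 else 0) with hrA
    obtain ⟨iB1, iB2, iB3, iB4, iB5, iB6⟩ :=
      pvBfsLoop_spec f R C (R.toNat * C.toNat + 1) [(a, b)] seen1 0 0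
        (by
          intro p hp
          rcases List.mem_cons.1 hp with rfl | hp'
          · exact ⟨(hseen1mem (a, b)).2 (Or.inr rfl), habfree⟩
          · cases hp')
        (by
          intro p hp hm
          rcases (hseen1mem p).1 hm with h' | rfl
          · exact hfree p hp ((hiff p hp).2 h')
          · exact habfree)
        (by
          intro p hp hm
          rcases (hseen1mem p).1 hm with h' | rfl
          · right
            intro q hq hqf
            refine (hseen1mem q).2 (Or.inl ?_)
            exact (hiff q hqf.1).1 (hcl p hp ((hiff p hp).2 h') q hq hqf)
          · left
            exact List.mem_cons_self)
        (by
          have := List.countP_le_length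
            (p := fun p => !mB seen1 p) (l := pvCells R C)
          unfold pvCnt
          rw [← len_pvCells R C]
          simp only [List.length_cons, List.length_nil]
          omega)
    set rB := pvBfsLoop f R C (R.toNat * C.toNat + 1) [(a, b)] seen1 0 0 with hrB
    have keyIff : ∀ p, pvInR R C p → (mA rA.1 p = true ↔ p ∈ rB.1) := by
      intro p hp
      constructor
      · intro hm
        rcases iA3 p hp hm with h' | ⟨s, hs, hreach⟩
        · rw [heq1 p hp] at h'
          exact iB1 p (mB_true.1 h')
        · rcases List.mem_cons.1 hs with rfl | hs'
          · refine reach_closed (P := fun q => q ∈ rB.1) iB4 hreach ?_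
            exact iB1 _ ((hseen1mem _).2 (Or.inr rfl))
          · cases hs'
      · intro hm
        rcases iB2 p hm with h' | ⟨z, hz, hreach⟩
        · rw [← mB_true, ← heq1 p hp] at h'
          exact iA2 p hp h'
        · rcases List.mem_cons.1 hz with rfl | hz'
          · refine reach_closed (P := fun q => mA rA.1 q = true) iA5 hreach ?_
            exact iA2 _ hab hvis1ab
          · cases hz'
    have oEq : rA.2.1 = rB.2.1 := by
      rw [iA6, iB5]
      have hcnt : pvCnt R C (fun p => mA rA.1 p && !mA vis1 p && isK f p) =
          pvCnt R C (fun p => mB rB.1 p && !mB seen1 p && isK f p) := by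
        unfold pvCnt
        refine List.countP_congr (fun q hq => ?_)
        have hq' := mem_pvCells.1 hq
        have e2 : mA rA.1 q = mB rB.1 q := by
          refine bool_eq_of_iff ?_
          rw [mB_true]
          exact keyIff q hq'
        rw [heq1 q hq', e2]
      rw [hcnt]
      by_cases hk : pvAt f a b = "k"
      · rw [if_pos hk]
        have : isK f (a, b) = true := by simp [isK, hk]
        rw [List.countP_cons, this]
        simp
      · rw [if_neg hk]
        have : isK f (a, b) = false := by simp [isK, hk]
        rw [List.countP_cons, this]
        simp
    have lEq : rA.2.2 = rB.2.2 := by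
      rw [iA7, iB6]
      have hcnt : pvCnt R C (fun p => mA rA.1 p && !mA vis1 p && isV f p) =
          pvCnt R C (fun p => mB rB.1 p && !mB seen1 p && isV f p) := by
        unfold pvCnt
        refine List.countP_congr (fun q hq => ?_)
        have hq' := mem_pvCells.1 hq
        have e2 : mA rA.1 q = mB rB.1 q := by
          refine bool_eq_of_iff ?_
          rw [mB_true]
          exact keyIff q hq'
        rw [heq1 q hq', e2]
      rw [hcnt]
      by_cases hk : pvAt f a b = "k"
      · rw [if_pos hk]
        have : isV f (a, b) = false := by simp [isV, hk]
        rw [List.countP_cons, this]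
        simp
      · rw [if_neg hk]
        by_cases hv : pvAt f a b = "v"
        · rw [if_pos hv]
          have : isV f (a, b) = true := by simp [isV, hv]
          rw [List.countP_cons, this]
          simp
        · rw [if_neg hv]
          have : isV f (a, b) = false := by simp [isV, hv]
          rw [List.countP_cons, this]
          simp
    have hbusca_eq : busca f (pvVisSet sA.1 a b) a b R C = rA := hbusca
    rw [hbusca_eq]
    by_cases hol : rA.2.1 > rA.2.2
    · rw [if_pos hol]
      refine ⟨iA1, keyIff, iA4, iA5, ?_, ?_⟩
      · dsimp only
        rw [sumS_append, hS]
        rw [← oEq, ← lEq]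
        rw [if_pos hol]
      · dsimp only
        rw [sumW_append, hW]
        rw [← oEq, ← lEq]
        rw [if_neg (by omega)]
    · rw [if_neg hol]
      refine ⟨iA1, keyIff, iA4, iA5, ?_, ?_⟩
      · dsimp only
        rw [sumS_append, hS]
        rw [← oEq, ← lEq]
        rw [if_neg hol]
      · dsimp only
        rw [sumW_append, hW]
        rw [← oEq, ← lEq]
        rw [if_pos (by omega)]
  · rw [if_neg hg]
    have hguardB : (a, b) ∈ sB.1 ∨ pvAt f a b = "#" := by
      by_cases hsharp : pvAt f a b = "#"
      · exact Or.inr hsharp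
      · left
        rw [← hiff (a, b) hab]
        cases hm : mA sA.1 (a, b)
        · exact absurd ⟨hm, hsharp⟩ hg
        · rfl
    rw [if_pos hguardB]
    exact ⟨hsh, hiff, hfree, hcl, hS, hW⟩

lemma init_rel (f : List (List String)) (R C : Int) :
    pvRel f R C
      ((PySem.List.pyRange 0 R 1).map (fun _ => List.replicate C.toNat false), 0, 0)
      (PySem.Set.empty, []) := by
  refine ⟨pvShape_init R C, ?_, ?_, ?_, rfl, rfl⟩
  · intro p _
    rw [mA_init]
    simp [PySem.Set.empty]
  · intro p _ hm
    rw [mA_init] at hm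
    cases hm
  · intro p _ hm
    rw [mA_init] at hm
    cases hm

theorem pv_mainA : ∀ (fazenda : List (List String)) (R : Int) (C : Int),
    resolver_fazenda fazenda R C = pvBfs fazenda R C := by
  intro f R C
  have hrel := foldl2_rel (pvRel f R C)
    (fun st i j =>
      if pvVisGet st.1 i j = false ∧ pvAt f i j ≠ "#" then
        if (busca f (pvVisSet st.1 i j) i j R C).2.1 > (busca f (pvVisSet st.1 i j) i j R C).2.2 then
          ((busca f (pvVisSet st.1 i j) i j R C).1,
            st.2.1 + (busca f (pvVisSet st.1 i j) i j R C).2.1, st.2.2)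
        else
          ((busca f (pvVisSet st.1 i j) i j R C).1,
            st.2.1, st.2.2 + (busca f (pvVisSet st.1 i j) i j R C).2.2)
      else st)
    (fun st i j =>
      if (i, j) ∈ st.1 ∨ pvAt f i j = "#" then st
      else
        ((pvBfsLoop f R C (R.toNat * C.toNat + 1) [(i, j)] (PySem.Set.add st.1 (i, j)) 0 0).1,
          st.2 ++ [((pvBfsLoop f R C (R.toNat * C.toNat + 1) [(i, j)] (PySem.Set.add st.1 (i, j)) 0 0).2.1,
            (pvBfsLoop f R C (R.toNat * C.toNat + 1) [(i, j)] (PySem.Set.add st.1 (i, j)) 0 0).2.2)])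
      )
    (PySem.List.pyRange 0 R 1) (PySem.List.pyRange 0 C 1)
    (fun i hi j hj sA sB h => by
      have hi' := PySem.List.mem_pyRange_one.1 hi
      have hj' := PySem.List.mem_pyRange_one.1 hj
      exact step_rel f R C i j ⟨hi'.1, hi'.2, hj'.1, hj'.2⟩ sA sB h)
    ((PySem.List.pyRange 0 R 1).map (fun _ => List.replicate C.toNat false), 0, 0)
    (PySem.Set.empty, [])
    (init_rel f R C)
  obtain ⟨_, _, _, _, h5, h6⟩ := hrel
  exact Prod.ext h5 h6


-- ---------- symmetry of the adjacency relation ----------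

lemma pvNbrs_symm {p q : Int × Int} (h : q ∈ pvNbrs p.1 p.2) : p ∈ pvNbrs q.1 q.2 := by
  simp only [pvNbrs, List.mem_cons, List.not_mem_nil, or_false] at h ⊢
  obtain ⟨a, b⟩ := p
  rcases h with rfl | rfl | rfl | rfl <;> simp <;> omega

lemma pvStepRel_symm {f : List (List String)} {R C : Int} {p q : Int × Int}
    (h : pvStepRel f R C p q) : pvStepRel f R C q p :=
  ⟨h.2.1, h.1, pvNbrs_symm h.2.2⟩

lemma pvReach_symm {f : List (List String)} {R C : Int} {p q : Int × Int}
    (h : pvReach f R C p q) : pvReach f R C q p := by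
  induction h with
  | refl => exact Relation.ReflTransGen.refl
  | tail _ hbc ih => exact Relation.ReflTransGen.head (pvStepRel_symm hbc) ih

-- ---------- row-major cell ids ----------

def pvId (C : Int) (p : Int × Int) : Int := p.1 * C + p.2

lemma pvId_nonneg {R C : Int} {p : Int × Int} (hp : pvInR R C p) : 0 ≤ pvId C p := by
  obtain ⟨h1, _, h3, h4⟩ := hp
  have : 0 ≤ p.1 * C := mul_nonneg h1 (by omega)
  unfold pvId
  omega

lemma pvId_lt {R C : Int} {p : Int × Int} (hp : pvInR R C p) : pvId C p < R * C := by
  obtain ⟨h1, h2, h3, h4⟩ := hp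
  have hle : p.1 + 1 ≤ R := by omega
  have : (p.1 + 1) * C ≤ R * C := mul_le_mul_of_nonneg_right hle (by omega)
  unfold pvId
  nlinarith

lemma pvId_inj {R C : Int} {p q : Int × Int} (hp : pvInR R C p) (hq : pvInR R C q)
    (h : pvId C p = pvId C q) : p = q := by
  obtain ⟨a, b⟩ := p
  obtain ⟨c, d⟩ := q
  obtain ⟨h1, h2, h3, h4⟩ := hp
  obtain ⟨k1, k2, k3, k4⟩ := hq
  simp only at h1 h2 h3 h4 k1 k2 k3 k4
  unfold pvId at h
  simp only at h
  have hac : a = c := by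
    rcases lt_trichotomy a c with hlt | heq | hgt
    · exfalso
      have : (a + 1) * C ≤ c * C := mul_le_mul_of_nonneg_right (by omega) (by omega)
      nlinarith
    · exact heq
    · exfalso
      have : (c + 1) * C ≤ a * C := mul_le_mul_of_nonneg_right (by omega) (by omega)
      nlinarith
  subst hac
  have : b = d := by omega
  simp [this]

lemma pvCells_pairwise (R C : Int) (hC : 0 < C) :
    (pvCells R C).Pairwise (fun p q => pvId C p < pvId C q) := by
  have h2 : ∀ b ∈ PySem.List.pyRange 0 C 1, 0 ≤ b ∧ b < C := by
    intro b hb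
    exact PySem.List.mem_pyRange_one.1 hb
  have h1 : (PySem.List.pyRange 0 R 1).Pairwise (· < ·) := PySem.List.pairwise_lt_pyRange_one 0 R
  have h2p : (PySem.List.pyRange 0 C 1).Pairwise (· < ·) := PySem.List.pairwise_lt_pyRange_one 0 C
  unfold pvCells
  generalize hl1 : PySem.List.pyRange 0 R 1 = l1 at h1
  generalize hl2 : PySem.List.pyRange 0 C 1 = l2 at h2 h2p
  clear hl1 hl2
  induction l1 with
  | nil => simp
  | cons a l1 ih =>
    obtain ⟨ha, h1'⟩ := List.pairwise_cons.1 h1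
    rw [List.product_cons, List.pairwise_append]
    refine ⟨?_, ih h1', ?_⟩
    · rw [List.pairwise_map]
      refine h2p.imp_of_mem ?_
      intro b b' hb hb' hlt
      unfold pvId
      simp only
      omega
    · intro x hx y hy
      obtain ⟨b, hb, rfl⟩ := List.mem_map.1 hx
      obtain ⟨a', b'⟩ := y
      have hmem := List.mem_product.1 hy
      have hab : a < a' := ha a' hmem.1
      have hb2 := h2 b hb
      have hb2' := h2 b' hmem.2
      unfold pvId
      simp only
      have : (a + 1) * C ≤ a' * C := mul_le_mul_of_nonneg_right (by omega) (by omega)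
      nlinarith

-- ---------- union-find: find terminates along decreasing parent chains ----------

def pvPg (par : List Int) (a : Int) : Int := PySem.List.pyGetD par a a

-- bounds part of the union-find invariant: parents in range and decreasing
def UFB (n : Int) (par : List Int) : Prop :=
  par.length = n.toNat ∧ ∀ x : Int, 0 ≤ x → x < n → 0 ≤ pvPg par x ∧ pvPg par x ≤ x

lemma ufFind_fuel {n : Int} {par : List Int} (hb : UFB n par) :
    ∀ (fuel : Nat), ∀ (fuel' : Nat) (a : Int), 0 ≤ a → a < n →
      a.toNat < fuel → a.toNat < fuel' → ufFind par fuel a = ufFind par fuel' a := by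
  intro fuel
  induction fuel with
  | zero => intro fuel' a _ _ h _; omega
  | succ fuel ih =>
    intro fuel' a ha0 han hf hf'
    match fuel', hf' with
    | fuel' + 1, _ =>
      show (if pvPg par a = a then a else ufFind par fuel (pvPg par a)) =
        (if pvPg par a = a then a else ufFind par fuel' (pvPg par a))
      by_cases hpa : pvPg par a = a
      · rw [if_pos hpa, if_pos hpa]
      · rw [if_neg hpa, if_neg hpa]
        obtain ⟨hp0, hple⟩ := hb.2 a ha0 han
        have hlt : (pvPg par a).toNat < a.toNat := by omega
        by_cases hz : (pvPg par a).toNat < fuel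
        · rw [ih fuel' (pvPg par a) hp0 (by omega) hz (by omega)]
        · omega

lemma ufRoot_unfold {n : Int} {par : List Int} (hb : UFB n par) {a : Int}
    (ha0 : 0 ≤ a) (han : a < n) :
    ufRoot par a = if pvPg par a = a then a else ufRoot par (pvPg par a) := by
  unfold ufRoot
  have hlen : par.length = n.toNat := hb.1
  have hfuel : a.toNat < par.length + 1 := by omega
  rw [ufFind_fuel hb (par.length + 1) (a.toNat + 1) a ha0 han hfuel (by omega)]
  show (if pvPg par a = a then a else ufFind par a.toNat (pvPg par a)) = _
  by_cases hpa : pvPg par a = a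
  · rw [if_pos hpa, if_pos hpa]
  · rw [if_neg hpa, if_neg hpa]
    obtain ⟨hp0, hple⟩ := hb.2 a ha0 han
    exact ufFind_fuel hb a.toNat (par.length + 1) (pvPg par a) hp0 (by omega)
      (by omega) (by have : par.length = n.toNat := hb.1; omega)

lemma ufRoot_spec {n : Int} {par : List Int} (hb : UFB n par) :
    ∀ (k : Nat) (a : Int), 0 ≤ a → a < n → a.toNat ≤ k →
      pvPg par (ufRoot par a) = ufRoot par a ∧ 0 ≤ ufRoot par a ∧ ufRoot par a ≤ a := by
  intro k
  induction k with
  | zero =>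
    intro a ha0 han hk
    have haz : a = 0 := by omega
    subst haz
    obtain ⟨hp0, hple⟩ := hb.2 0 (by omega) han
    have hfix : pvPg par 0 = 0 := by omega
    rw [ufRoot_unfold hb (by omega) han, if_pos hfix]
    exact ⟨hfix, le_refl _, le_refl _⟩
  | succ k ih =>
    intro a ha0 han hk
    rw [ufRoot_unfold hb ha0 han]
    by_cases hpa : pvPg par a = a
    · rw [if_pos hpa]
      exact ⟨hpa, ha0, le_refl _⟩
    · rw [if_neg hpa]
      obtain ⟨hp0, hple⟩ := hb.2 a ha0 han
      obtain ⟨r1, r2, r3⟩ := ih (pvPg par a) hp0 (by omega) (by omega)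
      exact ⟨r1, r2, by omega⟩

lemma ufRoot_fix {n : Int} {par : List Int} (hb : UFB n par) {a : Int}
    (ha0 : 0 ≤ a) (han : a < n) : pvPg par (ufRoot par a) = ufRoot par a :=
  (ufRoot_spec hb a.toNat a ha0 han (le_refl _)).1

lemma ufRoot_nonneg {n : Int} {par : List Int} (hb : UFB n par) {a : Int}
    (ha0 : 0 ≤ a) (han : a < n) : 0 ≤ ufRoot par a :=
  (ufRoot_spec hb a.toNat a ha0 han (le_refl _)).2.1

lemma ufRoot_le {n : Int} {par : List Int} (hb : UFB n par) {a : Int}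
    (ha0 : 0 ≤ a) (han : a < n) : ufRoot par a ≤ a :=
  (ufRoot_spec hb a.toNat a ha0 han (le_refl _)).2.2

lemma ufRoot_of_fix {n : Int} {par : List Int} (hb : UFB n par) {a : Int}
    (ha0 : 0 ≤ a) (han : a < n) (h : pvPg par a = a) : ufRoot par a = a := by
  rw [ufRoot_unfold hb ha0 han, if_pos h]

lemma ufRoot_step {n : Int} {par : List Int} (hb : UFB n par) {a : Int}
    (ha0 : 0 ≤ a) (han : a < n) (h : pvPg par a ≠ a) :
    ufRoot par a = ufRoot par (pvPg par a) := by
  rw [ufRoot_unfold hb ha0 han, if_neg h]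

-- ---------- union-find: soundness relation and the link/union lemmas ----------

-- two ids are related when they are ids of free cells in the same region (or equal)
def pvIdRel (f : List (List String)) (R C : Int) (x y : Int) : Prop :=
  x = y ∨ ∃ p q : Int × Int, pvId C p = x ∧ pvId C q = y ∧
    pvFree f R C p ∧ pvFree f R C q ∧ pvReach f R C p q

lemma idRel_refl (f : List (List String)) (R C : Int) (x : Int) : pvIdRel f R C x x :=
  Or.inl rfl

lemma idRel_symm {f : List (List String)} {R C : Int} {x y : Int}
    (h : pvIdRel f R C x y) : pvIdRel f R C y x := by
  rcases h with rfl | ⟨p, q, hp, hq, hfp, hfq, hr⟩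
  · exact Or.inl rfl
  · exact Or.inr ⟨q, p, hq, hp, hfq, hfp, pvReach_symm hr⟩

lemma idRel_trans {f : List (List String)} {R C : Int} {x y z : Int}
    (h1 : pvIdRel f R C x y) (h2 : pvIdRel f R C y z) : pvIdRel f R C x z := by
  rcases h1 with rfl | ⟨p, q, hp, hq, hfp, hfq, hr⟩
  · exact h2
  · rcases h2 with rfl | ⟨p', q', hp', hq', hfp', hfq', hr'⟩
    · exact Or.inr ⟨p, q, hp, hq, hfp, hfq, hr⟩
    · have : q = p' := pvId_inj hfq.1 hfp'.1 (hq.trans hp'.symm)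
      subst this
      exact Or.inr ⟨p, q', hp, hq', hfp, hfq', hr.trans hr'⟩

-- soundness of a parent table
def UFS (f : List (List String)) (R C : Int) (n : Int) (par : List Int) : Prop :=
  ∀ x : Int, 0 ≤ x → x < n → pvIdRel f R C (pvPg par x) x

lemma ufRoot_rel {f : List (List String)} {R C : Int} {n : Int} {par : List Int}
    (hb : UFB n par) (hs : UFS f R C n par) :
    ∀ (k : Nat) (a : Int), 0 ≤ a → a < n → a.toNat ≤ k → pvIdRel f R C (ufRoot par a) a := by
  intro k
  induction k with
  | zero =>
    intro a ha0 han hk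
    have haz : a = 0 := by omega
    subst haz
    obtain ⟨hp0, hple⟩ := hb.2 0 (by omega) han
    rw [ufRoot_of_fix hb (by omega) han (by omega)]
    exact idRel_refl _ _ _ _
  | succ k ih =>
    intro a ha0 han hk
    by_cases hpa : pvPg par a = a
    · rw [ufRoot_of_fix hb ha0 han hpa]
      exact idRel_refl _ _ _ _
    · rw [ufRoot_step hb ha0 han hpa]
      obtain ⟨hp0, hple⟩ := hb.2 a ha0 han
      exact idRel_trans (ih (pvPg par a) hp0 (by omega) (by omega)) (hs a ha0 han)

lemma pvPg_set {n : Int} {par : List Int} (hlen : par.length = n.toNat)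
    {r : Int} (hr0 : 0 ≤ r) (hrn : r < n) (v : Int) {x : Int} (hx0 : 0 ≤ x) (hxn : x < n) :
    pvPg (PySem.List.pySetD par r v) x = if x = r then v else pvPg par x := by
  unfold pvPg
  rw [PySem.List.pySetD_of_nonneg _ _ hr0,
    PySem.List.pyGetD_of_nonneg _ _ hx0, PySem.List.pyGetD_of_nonneg _ _ hx0]
  rw [List.getD_eq_getElem?_getD, List.getElem?_set, List.getD_eq_getElem?_getD]
  by_cases hxr : x = r
  · subst hxr
    rw [if_pos rfl, if_pos (by omega)]
    simp
  · rw [if_neg (by omega), if_neg hxr]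

lemma uf_link {f : List (List String)} {R C : Int} {n : Int} {par : List Int}
    (hb : UFB n par) (hs : UFS f R C n par)
    {r v : Int} (hr0 : 0 ≤ r) (hrn : r < n) (hroot : pvPg par r = r)
    (hv0 : 0 ≤ v) (hvr : v < r) (hrel : pvIdRel f R C v r) :
    UFB n (PySem.List.pySetD par r v) ∧ UFS f R C n (PySem.List.pySetD par r v) ∧
    (∀ x : Int, 0 ≤ x → x < n →
      ufRoot (PySem.List.pySetD par r v) x =
        ufRoot (PySem.List.pySetD par r v) (ufRoot par x)) := by
  set par' := PySem.List.pySetD par r v with hpar'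
  have hlen : par.length = n.toNat := hb.1
  have hlen' : par'.length = n.toNat := by
    rw [hpar', PySem.List.pySetD_of_nonneg _ _ hr0, List.length_set, hlen]
  have hpg : ∀ x : Int, 0 ≤ x → x < n → pvPg par' x = if x = r then v else pvPg par x :=
    fun x hx0 hxn => pvPg_set hlen hr0 hrn v hx0 hxn
  have hb' : UFB n par' := by
    refine ⟨hlen', fun x hx0 hxn => ?_⟩
    rw [hpg x hx0 hxn]
    by_cases hxr : x = r
    · subst hxr
      rw [if_pos rfl]
      omega
    · rw [if_neg hxr]
      exact hb.2 x hx0 hxn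
  have hs' : UFS f R C n par' := by
    intro x hx0 hxn
    rw [hpg x hx0 hxn]
    by_cases hxr : x = r
    · subst hxr
      rw [if_pos rfl]
      exact hrel
    · rw [if_neg hxr]
      exact hs x hx0 hxn
  refine ⟨hb', hs', ?_⟩
  have key : ∀ (k : Nat) (x : Int), 0 ≤ x → x < n → x.toNat ≤ k →
      ufRoot par' x = ufRoot par' (ufRoot par x) := by
    intro k
    induction k with
    | zero =>
      intro x hx0 hxn hk
      have hxz : x = 0 := by omega
      subst hxz
      have hfix : pvPg par 0 = 0 := by
        obtain ⟨h1, h2⟩ := hb.2 0 (by omega) hxn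
        omega
      rw [ufRoot_of_fix hb (by omega) hxn hfix]
    | succ k ih =>
      intro x hx0 hxn hk
      by_cases hpa : pvPg par x = x
      · rw [ufRoot_of_fix hb hx0 hxn hpa]
      · have hxner : x ≠ r := fun h => hpa (h ▸ hroot)
        obtain ⟨hp0, hple⟩ := hb.2 x hx0 hxn
        have hpg' : pvPg par' x = pvPg par x := by
          rw [hpg x hx0 hxn, if_neg hxner]
        have hstep' : ufRoot par' x = ufRoot par' (pvPg par x) := by
          rw [← hpg']
          exact ufRoot_step hb' hx0 hxn (by rw [hpg']; exact hpa)
        rw [hstep', ufRoot_step hb hx0 hxn hpa]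
        exact ih (pvPg par x) hp0 (by omega) (by omega)
  exact fun x hx0 hxn => key x.toNat x hx0 hxn (le_refl _)

lemma uf_union {f : List (List String)} {R C : Int} {n : Int} {par : List Int}
    (hb : UFB n par) (hs : UFS f R C n par)
    {a b : Int} (ha0 : 0 ≤ a) (han : a < n) (hb0 : 0 ≤ b) (hbn : b < n)
    (hab : pvIdRel f R C a b) :
    UFB n (ufUnion par a b) ∧ UFS f R C n (ufUnion par a b) ∧
    (∀ x : Int, 0 ≤ x → x < n →
      ufRoot (ufUnion par a b) x = ufRoot (ufUnion par a b) (ufRoot par x)) ∧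
    ufRoot (ufUnion par a b) a = ufRoot (ufUnion par a b) b := by
  have hra := ufRoot_rel hb hs a.toNat a ha0 han (le_refl _)
  have hrb := ufRoot_rel hb hs b.toNat b hb0 hbn (le_refl _)
  have hra0 := ufRoot_nonneg hb ha0 han
  have hrale := ufRoot_le hb ha0 han
  have hrb0 := ufRoot_nonneg hb hb0 hbn
  have hrble := ufRoot_le hb hb0 hbn
  have hfa := ufRoot_fix hb ha0 han
  have hfb := ufRoot_fix hb hb0 hbn
  have hrel : pvIdRel f R C (ufRoot par a) (ufRoot par b) :=
    idRel_trans hra (idRel_trans hab (idRel_symm hrb))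
  unfold ufUnion
  by_cases h1 : ufRoot par a < ufRoot par b
  · rw [if_pos h1]
    obtain ⟨hb', hs', hkey⟩ := uf_link hb hs hrb0 (by omega) hfb hra0 h1 hrel
    refine ⟨hb', hs', hkey, ?_⟩
    rw [hkey a ha0 han, hkey b hb0 hbn]
    have hpg' : pvPg (PySem.List.pySetD par (ufRoot par b) (ufRoot par a)) (ufRoot par b) =
        ufRoot par a := by
      rw [pvPg_set hb.1 hrb0 (by omega) _ hrb0 (by omega), if_pos rfl]
    rw [ufRoot_step hb' hrb0 (by omega) (by rw [hpg']; omega), hpg']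
  · rw [if_neg h1]
    by_cases h2 : ufRoot par b < ufRoot par a
    · rw [if_pos h2]
      obtain ⟨hb', hs', hkey⟩ := uf_link hb hs hra0 (by omega) hfa hrb0 h2 (idRel_symm hrel)
      refine ⟨hb', hs', hkey, ?_⟩
      rw [hkey a ha0 han, hkey b hb0 hbn]
      have hpg' : pvPg (PySem.List.pySetD par (ufRoot par a) (ufRoot par b)) (ufRoot par a) =
          ufRoot par b := by
        rw [pvPg_set hb.1 hra0 (by omega) _ hra0 (by omega), if_pos rfl]
      rw [ufRoot_step hb' hra0 (by omega) (by rw [hpg']; omega), hpg']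
    · rw [if_neg h2]
      have heq : ufRoot par a = ufRoot par b := by omega
      refine ⟨hb, hs, ?_, heq⟩
      intro x hx0 hxn
      have hrx0 := ufRoot_nonneg hb hx0 hxn
      have hrxle := ufRoot_le hb hx0 hxn
      rw [ufRoot_of_fix hb hrx0 (by omega) (ufRoot_fix hb hx0 hxn)]

-- ---------- generic fold shapes for the row-major scans ----------

lemma foldl_prod {σ : Type} (l1 l2 : List Int) (g : σ → Int → Int → σ) :
    ∀ (init : σ),
      l1.foldl (fun s a => l2.foldl (fun s b => g s a b) s) init =
        (l1 ×ˢ l2).foldl (fun s p => g s p.1 p.2) init := by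
  induction l1 with
  | nil => intro init; simp
  | cons a l1 ih =>
    intro init
    rw [List.foldl_cons, List.product_cons, List.foldl_append, List.foldl_map, ih]

lemma foldl_prefix_inv {σ α : Type} (L : List α) (step : σ → α → σ)
    (Inv : List α → σ → Prop)
    (hstep : ∀ (P : List α) (c : α) (rest : List α), L = P ++ c :: rest →
      ∀ st, Inv P st → Inv (P ++ [c]) (step st c)) :
    ∀ st, Inv [] st → Inv L (L.foldl step st) := by
  suffices aux : ∀ (rest P : List α), L = P ++ rest →
      ∀ st, Inv P st → Inv L (rest.foldl step st) by
    intro st h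
    exact aux L [] rfl st h
  intro rest
  induction rest with
  | nil =>
    intro P hP st h
    rw [hP, List.append_nil]
    exact h
  | cons c rest ih =>
    intro P hP st h
    rw [List.foldl_cons]
    exact ih (P ++ [c]) (by rw [hP, List.append_assoc]; rfl) _
      (hstep P c rest hP st h)

-- ---------- pass 1: the union scan establishes the component structure ----------

lemma pvId_bounds {R C : Int} {p : Int × Int} (hp : pvInR R C p) :
    0 ≤ pvId C p ∧ pvId C p < R * C :=
  ⟨pvId_nonneg hp, pvId_lt hp⟩

lemma pvId_right (C : Int) (c : Int × Int) : pvId C (c.1, c.2 + 1) = c.1 * C + c.2 + 1 := by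
  unfold pvId
  ring

lemma pvId_down (C : Int) (c : Int × Int) : pvId C (c.1 + 1, c.2) = (c.1 + 1) * C + c.2 := rfl

lemma pvId_self (C : Int) (c : Int × Int) : pvId C c = c.1 * C + c.2 := rfl

def UInv (f : List (List String)) (R C : Int) (P : List (Int × Int)) (par : List Int) : Prop :=
  UFB (R * C) par ∧ UFS f R C (R * C) par ∧
  ∀ p ∈ P, pvFree f R C p →
    (p.2 + 1 < C → pvAt f p.1 (p.2 + 1) ≠ "#" →
      ufRoot par (pvId C p) = ufRoot par (pvId C (p.1, p.2 + 1))) ∧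
    (p.1 + 1 < R → pvAt f (p.1 + 1) p.2 ≠ "#" →
      ufRoot par (pvId C p) = ufRoot par (pvId C (p.1 + 1, p.2)))

lemma uf_preserve {n : Int} {par par' : List Int}
    (hkey : ∀ x : Int, 0 ≤ x → x < n → ufRoot par' x = ufRoot par' (ufRoot par x))
    {x y : Int} (hx0 : 0 ≤ x) (hxn : x < n) (hy0 : 0 ≤ y) (hyn : y < n)
    (h : ufRoot par x = ufRoot par y) : ufRoot par' x = ufRoot par' y := by
  rw [hkey x hx0 hxn, hkey y hy0 hyn, h]

lemma uf_id_key {n : Int} {par : List Int} (hb : UFB n par) :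
    ∀ x : Int, 0 ≤ x → x < n → ufRoot par x = ufRoot par (ufRoot par x) := by
  intro x hx0 hxn
  have hrx0 := ufRoot_nonneg hb hx0 hxn
  have hrxle := ufRoot_le hb hx0 hxn
  rw [ufRoot_of_fix hb hrx0 (by omega) (ufRoot_fix hb hx0 hxn)]

lemma UInv_step (f : List (List String)) (R C : Int)
    (P : List (Int × Int)) (c : Int × Int) (hc : pvInR R C c)
    (par : List Int) (h : UInv f R C P par) :
    UInv f R C (P ++ [c])
      (if pvAt f c.1 c.2 = "#" then par
       else
        (if c.1 + 1 < R ∧ pvAt f (c.1 + 1) c.2 ≠ "#" then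
          ufUnion (if c.2 + 1 < C ∧ pvAt f c.1 (c.2 + 1) ≠ "#" then
              ufUnion par (c.1 * C + c.2) (c.1 * C + c.2 + 1) else par)
            (c.1 * C + c.2) ((c.1 + 1) * C + c.2)
         else (if c.2 + 1 < C ∧ pvAt f c.1 (c.2 + 1) ≠ "#" then
              ufUnion par (c.1 * C + c.2) (c.1 * C + c.2 + 1) else par))) := by
  obtain ⟨hb, hs, hedges⟩ := h
  by_cases hwall : pvAt f c.1 c.2 = "#"
  · rw [if_pos hwall]
    refine ⟨hb, hs, ?_⟩
    intro p hp hfp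
    rcases List.mem_append.1 hp with hp' | hp'
    · exact hedges p hp' hfp
    · rw [List.mem_singleton.1 hp'] at hfp
      exact absurd hwall hfp.2
  · rw [if_neg hwall]
    have hcfree : pvFree f R C c := ⟨hc, hwall⟩
    have hidc := pvId_bounds hc
    rw [pvId_self] at hidc
    set par1 := (if c.2 + 1 < C ∧ pvAt f c.1 (c.2 + 1) ≠ "#" then
        ufUnion par (c.1 * C + c.2) (c.1 * C + c.2 + 1) else par) with hpar1
    have h1 : UFB (R * C) par1 ∧ UFS f R C (R * C) par1 ∧
        (∀ x : Int, 0 ≤ x → x < R * C → ufRoot par1 x = ufRoot par1 (ufRoot par x)) ∧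
        (c.2 + 1 < C → pvAt f c.1 (c.2 + 1) ≠ "#" →
          ufRoot par1 (pvId C c) = ufRoot par1 (pvId C (c.1, c.2 + 1))) := by
      by_cases hg : c.2 + 1 < C ∧ pvAt f c.1 (c.2 + 1) ≠ "#"
      · rw [hpar1, if_pos hg]
        have hq : pvInR R C (c.1, c.2 + 1) := ⟨hc.1, hc.2.1, by omega, hg.1⟩
        have hqfree : pvFree f R C (c.1, c.2 + 1) := ⟨hq, hg.2⟩
        have hidq := pvId_bounds hq
        rw [pvId_right] at hidq
        have hrel : pvIdRel f R C (c.1 * C + c.2) (c.1 * C + c.2 + 1) := by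
          rw [← pvId_right C c, ← pvId_self C c]
          exact Or.inr ⟨c, (c.1, c.2 + 1), rfl, rfl, hcfree, hqfree,
            Relation.ReflTransGen.single ⟨hcfree, hqfree, by simp [pvNbrs]⟩⟩
        obtain ⟨u1, u2, u3, u4⟩ := uf_union hb hs hidc.1 hidc.2 (by omega) hidq.2 hrel
        refine ⟨u1, u2, u3, fun _ _ => ?_⟩
        rw [pvId_self, pvId_right]
        exact u4
      · rw [hpar1, if_neg hg]
        exact ⟨hb, hs, uf_id_key hb, fun hlt hsh => absurd ⟨hlt, hsh⟩ hg⟩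
    obtain ⟨hb1, hs1, hkey1, hedge1⟩ := h1
    set par2 := (if c.1 + 1 < R ∧ pvAt f (c.1 + 1) c.2 ≠ "#" then
        ufUnion par1 (c.1 * C + c.2) ((c.1 + 1) * C + c.2) else par1) with hpar2
    have h2 : UFB (R * C) par2 ∧ UFS f R C (R * C) par2 ∧
        (∀ x : Int, 0 ≤ x → x < R * C → ufRoot par2 x = ufRoot par2 (ufRoot par1 x)) ∧
        (c.1 + 1 < R → pvAt f (c.1 + 1) c.2 ≠ "#" →
          ufRoot par2 (pvId C c) = ufRoot par2 (pvId C (c.1 + 1, c.2))) := by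
      by_cases hg : c.1 + 1 < R ∧ pvAt f (c.1 + 1) c.2 ≠ "#"
      · rw [hpar2, if_pos hg]
        have hq : pvInR R C (c.1 + 1, c.2) := ⟨by omega, hg.1, hc.2.2.1, hc.2.2.2⟩
        have hqfree : pvFree f R C (c.1 + 1, c.2) := ⟨hq, hg.2⟩
        have hidq := pvId_bounds hq
        rw [pvId_down] at hidq
        have hrel : pvIdRel f R C (c.1 * C + c.2) ((c.1 + 1) * C + c.2) := by
          rw [← pvId_down C c, ← pvId_self C c]
          exact Or.inr ⟨c, (c.1 + 1, c.2), rfl, rfl, hcfree, hqfree,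
            Relation.ReflTransGen.single ⟨hcfree, hqfree, by simp [pvNbrs]⟩⟩
        obtain ⟨u1, u2, u3, u4⟩ := uf_union hb1 hs1 hidc.1 hidc.2 hidq.1 hidq.2 hrel
        refine ⟨u1, u2, u3, fun _ _ => ?_⟩
        rw [pvId_self, pvId_down]
        exact u4
      · rw [hpar2, if_neg hg]
        exact ⟨hb1, hs1, uf_id_key hb1, fun hlt hsh => absurd ⟨hlt, hsh⟩ hg⟩
    obtain ⟨hb2, hs2, hkey2, hedge2⟩ := h2
    have hpres : ∀ x y : Int, 0 ≤ x → x < R * C → 0 ≤ y → y < R * C →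
        ufRoot par x = ufRoot par y → ufRoot par2 x = ufRoot par2 y := by
      intro x y hx0 hxn hy0 hyn hxy
      exact uf_preserve hkey2 hx0 hxn hy0 hyn (uf_preserve hkey1 hx0 hxn hy0 hyn hxy)
    refine ⟨hb2, hs2, ?_⟩
    intro p hp hfp
    rcases List.mem_append.1 hp with hp' | hp'
    · obtain ⟨e1, e2⟩ := hedges p hp' hfp
      have hidp := pvId_bounds hfp.1
      constructor
      · intro hlt hsh
        have hq : pvInR R C (p.1, p.2 + 1) := ⟨hfp.1.1, hfp.1.2.1, by omega, hlt⟩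
        have hidq := pvId_bounds hq
        exact hpres _ _ hidp.1 hidp.2 hidq.1 hidq.2 (e1 hlt hsh)
      · intro hlt hsh
        have hq : pvInR R C (p.1 + 1, p.2) := ⟨by omega, hlt, hfp.1.2.2.1, hfp.1.2.2.2⟩
        have hidq := pvId_bounds hq
        exact hpres _ _ hidp.1 hidp.2 hidq.1 hidq.2 (e2 hlt hsh)
    · rw [List.mem_singleton.1 hp']
      refine ⟨?_, hedge2⟩
      intro hlt hsh
      have hq : pvInR R C (c.1, c.2 + 1) := ⟨hc.1, hc.2.1, by omega, hlt⟩
      have hidq := pvId_bounds hq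
      refine uf_preserve hkey2 ?_ ?_ ?_ ?_ (hedge1 hlt hsh) <;>
        first
          | exact (pvId_bounds hc).1
          | exact (pvId_bounds hc).2
          | exact hidq.1
          | exact hidq.2

-- ---------- pass 1 summary: roots characterise the regions ----------

lemma pvPg_init {n x : Int} (hx0 : 0 ≤ x) (hxn : x < n) :
    pvPg (PySem.List.pyRange 0 n 1) x = x := by
  unfold pvPg
  rw [PySem.List.pyGetD_of_nonneg _ _ hx0]
  have hlen : (PySem.List.pyRange 0 n 1).length = n.toNat := by
    rw [PySem.List.length_pyRange_one]
    omega
  have hlt : x.toNat < (PySem.List.pyRange 0 n 1).length := by omega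
  rw [List.getD_eq_getElem _ _ hlt, PySem.List.getElem_pyRange_one]
  omega

lemma UInv_init (f : List (List String)) (R C : Int) :
    UInv f R C [] (PySem.List.pyRange 0 (R * C) 1) := by
  refine ⟨⟨?_, ?_⟩, ?_, by simp⟩
  · rw [PySem.List.length_pyRange_one]
    congr 1
    omega
  · intro x hx0 hxn
    rw [pvPg_init hx0 hxn]
    omega
  · intro x hx0 hxn
    rw [pvPg_init hx0 hxn]
    exact idRel_refl f R C x

lemma ufUnions_inv (f : List (List String)) (R C : Int) (hR : 0 < R) (hC : 0 < C) :
    UInv f R C (pvCells R C) (ufUnions f R C) := by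
  have hmax : max R 0 * max C 0 = R * C := by
    rw [max_eq_left hR.le, max_eq_left hC.le]
  have heq : ufUnions f R C = (pvCells R C).foldl
      (fun par p =>
        if pvAt f p.1 p.2 = "#" then par
        else
          (if p.1 + 1 < R ∧ pvAt f (p.1 + 1) p.2 ≠ "#" then
            ufUnion (if p.2 + 1 < C ∧ pvAt f p.1 (p.2 + 1) ≠ "#" then
                ufUnion par (p.1 * C + p.2) (p.1 * C + p.2 + 1) else par)
              (p.1 * C + p.2) ((p.1 + 1) * C + p.2)
           else (if p.2 + 1 < C ∧ pvAt f p.1 (p.2 + 1) ≠ "#" then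
                ufUnion par (p.1 * C + p.2) (p.1 * C + p.2 + 1) else par)))
      (PySem.List.pyRange 0 (max R 0 * max C 0) 1) := by
    unfold ufUnions pvCells
    rw [foldl_prod]
  rw [heq, hmax]
  refine foldl_prefix_inv (pvCells R C) _ (UInv f R C) ?_ _ (UInv_init f R C)
  intro P c rest hL st hst
  have hc : c ∈ pvCells R C := by
    rw [hL]
    exact List.mem_append_right _ List.mem_cons_self
  exact UInv_step f R C P c (mem_pvCells.1 hc) st hst

lemma step_sameRoot {f : List (List String)} {R C : Int} {p q : Int × Int}
    (h : pvStepRel f R C p q) :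
    ufRoot (ufUnions f R C) (pvId C p) = ufRoot (ufUnions f R C) (pvId C q) := by
  obtain ⟨hfp, hfq, hnbr⟩ := h
  have hR : 0 < R := by obtain ⟨h1, h2, _, _⟩ := hfp.1; omega
  have hC : 0 < C := by obtain ⟨_, _, h3, h4⟩ := hfp.1; omega
  have hedges := (ufUnions_inv f R C hR hC).2.2
  simp only [pvNbrs, List.mem_cons, List.not_mem_nil, or_false] at hnbr
  rcases hnbr with hq | hq | hq | hq
  · -- q is above p: use q's down edge
    subst hq
    obtain ⟨e1, e2⟩ := hedges (p.1 - 1, p.2) (mem_pvCells.2 hfq.1) hfq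
    dsimp only at e1 e2
    have hup : p.1 - 1 + 1 = p.1 := by omega
    have h2 := e2 (by rw [hup]; exact hfp.1.2.1) (by rw [hup]; exact hfp.2)
    rw [hup, Prod.mk.eta] at h2
    exact h2.symm
  · -- q is below p: use p's down edge
    subst hq
    obtain ⟨e1, e2⟩ := hedges p (mem_pvCells.2 hfp.1) hfp
    exact e2 hfq.1.2.1 hfq.2
  · -- q is left of p: use q's right edge
    subst hq
    obtain ⟨e1, e2⟩ := hedges (p.1, p.2 - 1) (mem_pvCells.2 hfq.1) hfq
    dsimp only at e1 e2
    have hup : p.2 - 1 + 1 = p.2 := by omega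
    have h2 := e1 (by rw [hup]; exact hfp.1.2.2.2) (by rw [hup]; exact hfp.2)
    rw [hup, Prod.mk.eta] at h2
    exact h2.symm
  · -- q is right of p: use p's right edge
    subst hq
    obtain ⟨e1, e2⟩ := hedges p (mem_pvCells.2 hfp.1) hfp
    exact e1 hfq.1.2.2.2 hfq.2

lemma reach_sameRoot {f : List (List String)} {R C : Int} {p q : Int × Int}
    (h : pvReach f R C p q) :
    ufRoot (ufUnions f R C) (pvId C p) = ufRoot (ufUnions f R C) (pvId C q) := by
  induction h with
  | refl => rfl
  | tail _ hbc ih => exact ih.trans (step_sameRoot hbc)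

lemma sameRoot_iff_reach {f : List (List String)} {R C : Int} {p q : Int × Int}
    (hp : pvFree f R C p) (hq : pvFree f R C q) :
    ufRoot (ufUnions f R C) (pvId C p) = ufRoot (ufUnions f R C) (pvId C q) ↔
      pvReach f R C p q := by
  constructor
  · intro h
    have hR : 0 < R := by obtain ⟨h1, h2, _, _⟩ := hp.1; omega
    have hC : 0 < C := by obtain ⟨_, _, h3, h4⟩ := hp.1; omega
    obtain ⟨hb, hs, _⟩ := ufUnions_inv f R C hR hC
    have hbp := pvId_bounds hp.1
    have hbq := pvId_bounds hq.1
    have h1 := ufRoot_rel hb hs (pvId C p).toNat (pvId C p) hbp.1 hbp.2 (le_refl _)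
    have h2 := ufRoot_rel hb hs (pvId C q).toNat (pvId C q) hbq.1 hbq.2 (le_refl _)
    rw [h] at h1
    have h3 : pvIdRel f R C (pvId C p) (pvId C q) := idRel_trans (idRel_symm h1) h2
    rcases h3 with heq | ⟨p0, q0, hidp0, hidq0, hfp0, hfq0, hr⟩
    · rw [pvId_inj hp.1 hq.1 heq]
      exact Relation.ReflTransGen.refl
    · have hp0 : p0 = p := pvId_inj hfp0.1 hp.1 hidp0
      have hq0 : q0 = q := pvId_inj hfq0.1 hq.1 hidq0
      rw [hp0, hq0] at hr
      exact hr
  · exact reach_sameRoot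

-- ---------- pass 2: one increasing pass resolves every root ----------

lemma pyGetD_range_self {n x : Int} (d : Int) (hx0 : 0 ≤ x) (hxn : x < n) :
    PySem.List.pyGetD (PySem.List.pyRange 0 n 1) x d = x := by
  rw [PySem.List.pyGetD_of_nonneg _ _ hx0]
  have hlen : (PySem.List.pyRange 0 n 1).length = n.toNat := by
    rw [PySem.List.length_pyRange_one]
    omega
  have hlt : x.toNat < (PySem.List.pyRange 0 n 1).length := by omega
  rw [List.getD_eq_getElem _ _ hlt, PySem.List.getElem_pyRange_one]
  omega

lemma pyGetD_default_irrel {xs : List Int} {x : Int} (d d' : Int)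
    (hx0 : 0 ≤ x) (hxl : x < (xs.length : Int)) :
    PySem.List.pyGetD xs x d = PySem.List.pyGetD xs x d' := by
  rw [PySem.List.pyGetD_of_nonneg _ _ hx0, PySem.List.pyGetD_of_nonneg _ _ hx0]
  have hlt : x.toNat < xs.length := by omega
  rw [List.getD_eq_getElem _ _ hlt, List.getD_eq_getElem _ _ hlt]

lemma pyGetD_pySetD_range {xs : List Int} {r x : Int} (v d : Int)
    (hr0 : 0 ≤ r) (hrl : r < (xs.length : Int)) (hx0 : 0 ≤ x) (hxl : x < (xs.length : Int)) :
    PySem.List.pyGetD (PySem.List.pySetD xs r v) x d = if x = r then v else PySem.List.pyGetD xs x d := by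
  rw [PySem.List.pySetD_of_nonneg _ _ hr0,
    PySem.List.pyGetD_of_nonneg _ _ hx0, PySem.List.pyGetD_of_nonneg _ _ hx0]
  rw [List.getD_eq_getElem?_getD, List.getElem?_set, List.getD_eq_getElem?_getD]
  by_cases hxr : x = r
  · subst hxr
    rw [if_pos rfl, if_pos (by omega)]
    simp
  · rw [if_neg (by omega), if_neg hxr]

lemma ufResolve_spec {n : Int} {par : List Int} (hb : UFB n par) (hn : 0 ≤ n) :
    ∀ x : Int, 0 ≤ x → x < n →
      PySem.List.pyGetD (ufResolve par n) x 0 = ufRoot par x := by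
  have hlenpar : par.length = n.toNat := hb.1
  set L := PySem.List.pyRange 0 n 1 with hL
  have hpw : L.Pairwise (· < ·) := PySem.List.pairwise_lt_pyRange_one 0 n
  have hmemL : ∀ x : Int, x ∈ L ↔ 0 ≤ x ∧ x < n := fun x => PySem.List.mem_pyRange_one
  have hlenL : L.length = n.toNat := by
    rw [hL, PySem.List.length_pyRange_one]
    omega
  have main := foldl_prefix_inv L
    (fun root x => PySem.List.pySetD root x
      (PySem.List.pyGetD root (PySem.List.pyGetD par x 0) 0))
    (fun P st => st.length = n.toNat ∧
      ∀ x : Int, 0 ≤ x → x < n →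
        ((x ∈ P → PySem.List.pyGetD st x 0 = ufRoot par x) ∧
         (x ∉ P → PySem.List.pyGetD st x 0 = x)))
    ?_ L ?_
  · intro x hx0 hxn
    have := (main.2 x hx0 hxn).1 ((hmemL x).2 ⟨hx0, hxn⟩)
    unfold ufResolve
    rw [← hL]
    exact this
  · -- the step preserves the invariant
    intro P c rest hsplit st hinv
    obtain ⟨hlen, hst⟩ := hinv
    have hcL : c ∈ L := by rw [hsplit]; exact List.mem_append_right _ List.mem_cons_self
    obtain ⟨hc0, hcn⟩ := (hmemL c).1 hcL
    have hpw' := hsplit ▸ hpw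
    obtain ⟨hpwP, hpwR, hcross⟩ := List.pairwise_append.1 hpw'
    have hPlt : ∀ y ∈ P, y < c := fun y hy => hcross y hy c List.mem_cons_self
    have hltP : ∀ y : Int, 0 ≤ y → y < n → y < c → y ∈ P := by
      intro y hy0 hyn hyc
      have hyL : y ∈ L := (hmemL y).2 ⟨hy0, hyn⟩
      rw [hsplit] at hyL
      rcases List.mem_append.1 hyL with h' | h'
      · exact h'
      · rcases List.mem_cons.1 h' with rfl | h''
        · omega
        · have := (List.pairwise_cons.1 hpwR).1 y h''
          omega
    have hcP : c ∉ P := fun h => by have := hPlt c h; omega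
    -- the parent read
    have hpc : PySem.List.pyGetD par c 0 = pvPg par c := by
      unfold pvPg
      exact pyGetD_default_irrel 0 c hc0 (by omega)
    obtain ⟨hp0, hple⟩ := hb.2 c hc0 hcn
    -- the value written at c is the root of c
    have hval : PySem.List.pyGetD st (PySem.List.pyGetD par c 0) 0 = ufRoot par c := by
      rw [hpc]
      by_cases hfix : pvPg par c = c
      · rw [hfix, (hst c hc0 hcn).2 hcP, ufRoot_of_fix hb hc0 hcn hfix]
      · have hplt : pvPg par c < c := by omega
        rw [(hst (pvPg par c) hp0 (by omega)).1 (hltP _ hp0 (by omega) hplt),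
          ufRoot_step hb hc0 hcn hfix]
    dsimp only
    constructor
    · rw [PySem.List.pySetD_of_nonneg _ _ hc0, List.length_set, hlen]
    · intro x hx0 hxn
      have hget : PySem.List.pyGetD (PySem.List.pySetD st c
          (PySem.List.pyGetD st (PySem.List.pyGetD par c 0) 0)) x 0 =
          if x = c then PySem.List.pyGetD st (PySem.List.pyGetD par c 0) 0
          else PySem.List.pyGetD st x 0 :=
        pyGetD_pySetD_range _ 0 hc0 (by omega) hx0 (by omega)
      constructor
      · intro hx
        rcases List.mem_append.1 hx with h' | h'
        · have hxc : x ≠ c := by have := hPlt x h'; omega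
          rw [hget, if_neg hxc]
          exact (hst x hx0 hxn).1 h'
        · have hxc : x = c := List.mem_singleton.1 h'
          subst hxc
          rw [hget, if_pos rfl, hval]
      · intro hx
        have hxc : x ≠ c := fun h => hx (h ▸ List.mem_append_right _ List.mem_cons_self)
        rw [hget, if_neg hxc]
        exact (hst x hx0 hxn).2 (fun h => hx (List.mem_append_left _ h))
  · -- the initial state
    refine ⟨hlenL, fun x hx0 hxn => ⟨fun h => absurd h (List.not_mem_nil), ?_⟩⟩
    intro _
    exact pyGetD_range_self 0 hx0 hxn

-- ---------- regions, anchors and fibre counts ----------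

def pvRt (f : List (List String)) (R C : Int) (p : Int × Int) : Int :=
  ufRoot (ufUnions f R C) (pvId C p)

-- the anchor of a region is its first cell in row-major order
abbrev pvAnchor (f : List (List String)) (R C : Int) (p : Int × Int) : Prop :=
  pvFree f R C p ∧ ∀ q ∈ pvCells R C, pvFree f R C q →
    pvRt f R C q = pvRt f R C p → pvId C p ≤ pvId C q

def pvAnchors (f : List (List String)) (R C : Int) : List (Int × Int) :=
  (pvCells R C).filter (fun p => decide (pvAnchor f R C p))

def fibK (f : List (List String)) (R C : Int) (a : Int × Int) : Int :=
  ((pvCells R C).countP (fun q => decide (pvFree f R C q) &&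
    decide (pvRt f R C q = pvRt f R C a) && isK f q) : Int)

def fibV (f : List (List String)) (R C : Int) (a : Int × Int) : Int :=
  ((pvCells R C).countP (fun q => decide (pvFree f R C q) &&
    decide (pvRt f R C q = pvRt f R C a) && isV f q) : Int)

lemma rt_eq_iff_reach {f : List (List String)} {R C : Int} {p q : Int × Int}
    (hp : pvFree f R C p) (hq : pvFree f R C q) :
    pvRt f R C p = pvRt f R C q ↔ pvReach f R C p q := by
  unfold pvRt
  exact sameRoot_iff_reach hp hq

-- every free cell's region has an anchor that reaches it
lemma anchor_exists {f : List (List String)} {R C : Int} :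
    ∀ (k : Nat) (p : Int × Int), pvFree f R C p → (pvId C p).toNat ≤ k →
      ∃ a, pvAnchor f R C a ∧ pvReach f R C a p ∧ pvId C a ≤ pvId C p := by
  intro k
  induction k with
  | zero =>
    intro p hp hk
    by_cases ha : pvAnchor f R C p
    · exact ⟨p, ha, Relation.ReflTransGen.refl, le_refl _⟩
    · exfalso
      apply ha
      refine ⟨hp, fun q hq hfq hrt => ?_⟩
      have h0 := pvId_nonneg hp.1
      have h0' := pvId_nonneg (mem_pvCells.1 hq)
      omega
  | succ k ih =>
    intro p hp hk
    by_cases ha : pvAnchor f R C p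
    · exact ⟨p, ha, Relation.ReflTransGen.refl, le_refl _⟩
    · have : ∃ q ∈ pvCells R C, pvFree f R C q ∧ pvRt f R C q = pvRt f R C p ∧
          pvId C q < pvId C p := by
        by_contra hno
        push_neg at hno
        exact ha ⟨hp, fun q hq hfq hrt => hno q hq hfq hrt⟩
      obtain ⟨q, hq, hfq, hrt, hlt⟩ := this
      have h0 := pvId_nonneg hfq.1
      obtain ⟨a, ha', hr, hle⟩ := ih q hfq (by omega)
      exact ⟨a, ha', hr.trans ((rt_eq_iff_reach hfq hp).1 hrt), by omega⟩

-- two anchors of the same region coincide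
lemma anchor_unique {f : List (List String)} {R C : Int} {a a' : Int × Int}
    (ha : pvAnchor f R C a) (ha' : pvAnchor f R C a')
    (h : pvRt f R C a = pvRt f R C a') : a = a' := by
  have h1 := ha.2 a' (mem_pvCells.2 ha'.1.1) ha'.1 h.symm
  have h2 := ha'.2 a (mem_pvCells.2 ha.1.1) ha.1 h
  exact pvId_inj ha.1.1 ha'.1.1 (by omega)

-- ---------- the reference scan computes one summary per region, in anchor order ----------

lemma reach_free_right {f : List (List String)} {R C : Int} {a b : Int × Int}
    (h : pvReach f R C a b) (ha : pvFree f R C a) : pvFree f R C b := by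
  induction h with
  | refl => exact ha
  | tail _ hbc _ => exact hbc.2.1

def BInv (f : List (List String)) (R C : Int) (P : List (Int × Int))
    (st : PySem.Set (Int × Int) × List (Int × Int)) : Prop :=
  (∀ p : Int × Int, p ∈ st.1 ↔
    (pvFree f R C p ∧ ∃ q ∈ P, pvFree f R C q ∧ pvReach f R C q p)) ∧
  st.2 = (P.filter (fun p => decide (pvAnchor f R C p))).map
    (fun a => (fibK f R C a, fibV f R C a))

lemma BInv_step {f : List (List String)} {R C : Int} {P : List (Int × Int)}
    {c : Int × Int} {rest : List (Int × Int)}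
    (hsplit : pvCells R C = P ++ c :: rest)
    (st : PySem.Set (Int × Int) × List (Int × Int)) (h : BInv f R C P st) :
    BInv f R C (P ++ [c])
      (if (c.1, c.2) ∈ st.1 ∨ pvAt f c.1 c.2 = "#" then st
       else
        ((pvBfsLoop f R C (R.toNat * C.toNat + 1) [(c.1, c.2)]
            (PySem.Set.add st.1 (c.1, c.2)) 0 0).1,
          st.2 ++ [((pvBfsLoop f R C (R.toNat * C.toNat + 1) [(c.1, c.2)]
              (PySem.Set.add st.1 (c.1, c.2)) 0 0).2.1,
            (pvBfsLoop f R C (R.toNat * C.toNat + 1) [(c.1, c.2)]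
              (PySem.Set.add st.1 (c.1, c.2)) 0 0).2.2)])) := by
  rw [Prod.mk.eta]
  obtain ⟨hmem, hcomps⟩ := h
  have hcC : c ∈ pvCells R C := by
    rw [hsplit]
    exact List.mem_append_right _ List.mem_cons_self
  have hcin : pvInR R C c := mem_pvCells.1 hcC
  have hC : 0 < C := by
    obtain ⟨_, _, h3, h4⟩ := hcin
    omega
  have hpw := pvCells_pairwise R C hC
  have hpw' := hsplit ▸ hpw
  obtain ⟨hpwP, hpwR, hcross⟩ := List.pairwise_append.1 hpw'
  have hPlt : ∀ q ∈ P, pvId C q < pvId C c := fun q hq =>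
    hcross q hq c List.mem_cons_self
  have hltP : ∀ q ∈ pvCells R C, pvId C q < pvId C c → q ∈ P := by
    intro q hq hlt
    rw [hsplit] at hq
    rcases List.mem_append.1 hq with h' | h'
    · exact h'
    · rcases List.mem_cons.1 h' with rfl | h''
      · omega
      · have := (List.pairwise_cons.1 hpwR).1 q h''
        omega
  have hPsub : ∀ q ∈ P, q ∈ pvCells R C := by
    intro q hq
    rw [hsplit]
    exact List.mem_append_left _ hq
  by_cases hwall : pvAt f c.1 c.2 = "#"
  · rw [if_pos (Or.inr hwall)]
    constructor
    · intro p
      rw [hmem p]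
      constructor
      · rintro ⟨hfp, q, hq, hfq, hr⟩
        exact ⟨hfp, q, List.mem_append_left _ hq, hfq, hr⟩
      · rintro ⟨hfp, q, hq, hfq, hr⟩
        rcases List.mem_append.1 hq with h' | h'
        · exact ⟨hfp, q, h', hfq, hr⟩
        · rw [List.mem_singleton.1 h'] at hfq
          exact absurd hwall hfq.2
    · rw [hcomps, List.filter_append]
      have hdec : decide (pvAnchor f R C c) = false :=
        decide_eq_false (fun hanc => hanc.1.2 hwall)
      rw [List.filter_cons, hdec]
      simp
  · by_cases hcov : c ∈ st.1
    · rw [if_pos (Or.inl hcov)]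
      obtain ⟨hfc, q0, hq0, hfq0, hr0⟩ := (hmem c).1 hcov
      constructor
      · intro p
        rw [hmem p]
        constructor
        · rintro ⟨hfp, q, hq, hfq, hr⟩
          exact ⟨hfp, q, List.mem_append_left _ hq, hfq, hr⟩
        · rintro ⟨hfp, q, hq, hfq, hr⟩
          rcases List.mem_append.1 hq with h' | h'
          · exact ⟨hfp, q, h', hfq, hr⟩
          · rw [List.mem_singleton.1 h'] at hr
            exact ⟨hfp, q0, hq0, hfq0, hr0.trans hr⟩
      · rw [hcomps, List.filter_append]
        have hdec : decide (pvAnchor f R C c) = false := by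
          refine decide_eq_false (fun hanc => ?_)
          have h1 := hanc.2 q0 (hPsub q0 hq0) hfq0 ((rt_eq_iff_reach hfq0 hfc).2 hr0)
          have h2 := hPlt q0 hq0
          omega
        rw [List.filter_cons, hdec]
        simp
    · rw [if_neg (by rw [not_or]; exact ⟨hcov, hwall⟩)]
      have hfc : pvFree f R C c := ⟨hcin, hwall⟩
      have hnocov : ¬ ∃ q ∈ P, pvFree f R C q ∧ pvReach f R C q c := by
        rintro ⟨q, hq, hfq, hr⟩
        exact hcov ((hmem c).2 ⟨hfc, q, hq, hfq, hr⟩)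
      have hanc : pvAnchor f R C c := by
        refine ⟨hfc, fun q hq hfq hrt => ?_⟩
        by_contra hlt
        have hqP : q ∈ P := hltP q hq (by omega)
        exact hnocov ⟨q, hqP, hfq, (rt_eq_iff_reach hfq hfc).1 hrt⟩
      set seen1 := PySem.Set.add st.1 c with hseen1
      have hseen1mem : ∀ p, p ∈ seen1 ↔ p ∈ st.1 ∨ p = c :=
        fun p => PySem.Set.mem_add st.1 c p
      obtain ⟨iB1, iB2, iB3, iB4, iB5, iB6⟩ :=
        pvBfsLoop_spec f R C (R.toNat * C.toNat + 1) [c] seen1 0 0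
          (by
            intro p hp
            rcases List.mem_cons.1 hp with rfl | hp'
            · exact ⟨(hseen1mem p).2 (Or.inr rfl), hfc⟩
            · cases hp')
          (by
            intro p hp hm
            rcases (hseen1mem p).1 hm with h' | rfl
            · exact ((hmem p).1 h').1
            · exact hfc)
          (by
            intro p hp hm
            rcases (hseen1mem p).1 hm with h' | rfl
            · right
              intro q hq hqf
              obtain ⟨hfp, q0, hq0, hfq0, hr0⟩ := (hmem p).1 h'
              refine (hseen1mem q).2 (Or.inl ((hmem q).2 ⟨hqf, q0, hq0, hfq0, ?_⟩))
              exact hr0.trans (Relation.ReflTransGen.single ⟨hfp, hqf, hq⟩)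
            · left
              exact List.mem_cons_self)
          (by
            have := List.countP_le_length
              (p := fun p => !mB seen1 p) (l := pvCells R C)
            unfold pvCnt
            rw [← len_pvCells R C]
            simp only [List.length_cons, List.length_nil]
            omega)
      set r := pvBfsLoop f R C (R.toNat * C.toNat + 1) [c] seen1 0 0 with hr
      have hcr : c ∈ r.1 := iB1 c ((hseen1mem c).2 (Or.inr rfl))
      have hmem' : ∀ p : Int × Int, p ∈ r.1 ↔
          (pvFree f R C p ∧ ∃ q ∈ P ++ [c], pvFree f R C q ∧ pvReach f R C q p) := by
        intro p
        constructor
        · intro hp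
          rcases iB2 p hp with h' | ⟨z, hz, hreach⟩
          · rcases (hseen1mem p).1 h' with h'' | heq
            · obtain ⟨hfp, q, hq, hfq, hrq⟩ := (hmem p).1 h''
              exact ⟨hfp, q, List.mem_append_left _ hq, hfq, hrq⟩
            · rw [heq]
              exact ⟨hfc, c, List.mem_append_right _ List.mem_cons_self, hfc,
                Relation.ReflTransGen.refl⟩
          · rcases List.mem_cons.1 hz with heq | hz'
            · rw [heq] at hreach
              exact ⟨reach_free_right hreach hfc, c,
                List.mem_append_right _ List.mem_cons_self, hfc, hreach⟩
            · cases hz'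
        · rintro ⟨hfp, q, hq, hfq, hrq⟩
          rcases List.mem_append.1 hq with h' | h'
          · exact iB1 p ((hseen1mem p).2 (Or.inl ((hmem p).2 ⟨hfp, q, h', hfq, hrq⟩)))
          · rw [List.mem_singleton.1 h'] at hrq
            exact reach_closed (P := fun z => z ∈ r.1) iB4 hrq hcr
      -- the new summary equals the fibre counts of c
      have hpoint : ∀ q ∈ pvCells R C,
          (mB r.1 q && !mB seen1 q) =
          (decide (pvFree f R C q) && decide (pvRt f R C q = pvRt f R C c) &&
            !(decide (q = c))) := by
        intro q hq
        refine bool_eq_of_iff ?_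
        simp only [Bool.and_eq_true, mB_true, Bool.not_eq_true', mB_false,
          decide_eq_true_eq, Bool.not_eq_eq_eq_not, Bool.not_true,
          decide_eq_false_iff_not]
        constructor
        · rintro ⟨h1, h2⟩
          have hnotst : ¬ q ∈ st.1 := fun hst => h2 ((hseen1mem q).2 (Or.inl hst))
          have hne : q ≠ c := fun heq => h2 ((hseen1mem q).2 (Or.inr heq))
          have hfq : pvFree f R C q := iB3 q (mem_pvCells.1 hq) h1
          have hreach : pvReach f R C c q := by
            rcases iB2 q h1 with h' | ⟨z, hz, hreach⟩
            · exact absurd h' h2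
            · rcases List.mem_cons.1 hz with rfl | hz'
              · exact hreach
              · cases hz'
          exact ⟨⟨hfq, ((rt_eq_iff_reach hfc hfq).2 hreach).symm⟩, hne⟩
        · rintro ⟨⟨h1, h2⟩, h3⟩
          have hreach : pvReach f R C c q := (rt_eq_iff_reach hfc h1).1 h2.symm
          refine ⟨reach_closed (P := fun z => z ∈ r.1) iB4 hreach hcr, ?_⟩
          intro hmem1
          rcases (hseen1mem q).1 hmem1 with h' | h'
          · obtain ⟨hfq, q0, hq0, hfq0, hr0⟩ := (hmem q).1 h'
            exact hnocov ⟨q0, hq0, hfq0, hr0.trans (pvReach_symm hreach)⟩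
          · exact h3 h'
      have hcnt : ∀ ch : (Int × Int) → Bool,
          ((pvCells R C).countP (fun q => decide (pvFree f R C q) &&
              decide (pvRt f R C q = pvRt f R C c) && ch q) : Int) =
            (if ch c = true then 1 else 0) +
              (pvCnt R C (fun p => mB r.1 p && !mB seen1 p && ch p) : Int) := by
        intro ch
        have hcongr : pvCnt R C (fun p => mB r.1 p && !mB seen1 p && ch p) =
            (pvCells R C).countP (fun q => decide (pvFree f R C q) &&
              decide (pvRt f R C q = pvRt f R C c) && !(decide (q = c)) && ch q) := by
          unfold pvCnt
          refine List.countP_congr (fun q hq => ?_)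
          rw [hpoint q hq]
        rw [hcongr]
        by_cases hch : ch c = true
        · rw [if_pos hch]
          have hflip := pv_countP_flip (nodup_pvCells R C) hcC
            (m := fun q => decide (pvFree f R C q) &&
              decide (pvRt f R C q = pvRt f R C c) && !(decide (q = c)) && ch q)
            (m' := fun q => decide (pvFree f R C q) &&
              decide (pvRt f R C q = pvRt f R C c) && ch q)
            (fun q _ hqc => by simp [hqc])
            (by simp) (by simp [hfc, hch])
          rw [hflip]
          push_cast
          ring
        · rw [if_neg hch]
          have hstay := pv_countP_stay (pvCells R C) c
            (m := fun q => decide (pvFree f R C q) &&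
              decide (pvRt f R C q = pvRt f R C c) && !(decide (q = c)) && ch q)
            (m' := fun q => decide (pvFree f R C q) &&
              decide (pvRt f R C q = pvRt f R C c) && ch q)
            (fun q _ hqc => by simp [hqc])
            (by simp [hch])
          rw [hstay]
          omega
      have hK : r.2.1 = fibK f R C c := by
        rw [iB5, fibK, hcnt (isK f)]
        simp only [List.countP_cons, List.countP_nil]
        by_cases hk : isK f c = true
        · rw [if_pos hk]
          simp [hk]
        · rw [if_neg hk]
          simp only [Bool.not_eq_true] at hk
          simp [hk]
      have hV : r.2.2 = fibV f R C c := by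
        rw [iB6, fibV, hcnt (isV f)]
        simp only [List.countP_cons, List.countP_nil]
        by_cases hk : isV f c = true
        · rw [if_pos hk]
          simp [hk]
        · rw [if_neg hk]
          simp only [Bool.not_eq_true] at hk
          simp [hk]
      refine ⟨hmem', ?_⟩
      rw [hcomps, List.filter_append]
      have hdec : decide (pvAnchor f R C c) = true := decide_eq_true hanc
      rw [List.filter_cons, hdec]
      simp only [if_true, List.filter_nil, List.map_append, List.map_cons, List.map_nil]
      rw [hK, hV]

-- ---------- the reference scan, characterised ----------

lemma pvBfs_char (f : List (List String)) (R C : Int) :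
    pvBfs f R C =
      (sumS ((pvAnchors f R C).map (fun a => (fibK f R C a, fibV f R C a))),
       sumW ((pvAnchors f R C).map (fun a => (fibK f R C a, fibV f R C a)))) := by
  have hinit : BInv f R C [] (PySem.Set.empty, []) := by
    constructor
    · intro p
      constructor
      · intro h
        exfalso
        simp [PySem.Set.empty] at h
      · rintro ⟨_, q, hq, _⟩
        cases hq
    · rfl
  have hinv := foldl_prefix_inv (pvCells R C)
    (fun (st : PySem.Set (Int × Int) × List (Int × Int)) p =>
      if (p.1, p.2) ∈ st.1 ∨ pvAt f p.1 p.2 = "#" then st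
      else
        ((pvBfsLoop f R C (R.toNat * C.toNat + 1) [(p.1, p.2)]
            (PySem.Set.add st.1 (p.1, p.2)) 0 0).1,
          st.2 ++ [((pvBfsLoop f R C (R.toNat * C.toNat + 1) [(p.1, p.2)]
              (PySem.Set.add st.1 (p.1, p.2)) 0 0).2.1,
            (pvBfsLoop f R C (R.toNat * C.toNat + 1) [(p.1, p.2)]
              (PySem.Set.add st.1 (p.1, p.2)) 0 0).2.2)]))
    (BInv f R C)
    (fun P c rest hs st h => BInv_step hs st h)
    (PySem.Set.empty, []) hinit
  have hstate : (PySem.List.pyRange 0 R 1).foldl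
      (fun st i => (PySem.List.pyRange 0 C 1).foldl
        (fun (st : PySem.Set (Int × Int) × List (Int × Int)) j =>
          if (i, j) ∈ st.1 ∨ pvAt f i j = "#" then st
          else
            ((pvBfsLoop f R C (R.toNat * C.toNat + 1) [(i, j)]
                (PySem.Set.add st.1 (i, j)) 0 0).1,
              st.2 ++ [((pvBfsLoop f R C (R.toNat * C.toNat + 1) [(i, j)]
                  (PySem.Set.add st.1 (i, j)) 0 0).2.1,
                (pvBfsLoop f R C (R.toNat * C.toNat + 1) [(i, j)]
                  (PySem.Set.add st.1 (i, j)) 0 0).2.2)])) st) (PySem.Set.empty, []) =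
      (pvCells R C).foldl
        (fun (st : PySem.Set (Int × Int) × List (Int × Int)) p =>
          if (p.1, p.2) ∈ st.1 ∨ pvAt f p.1 p.2 = "#" then st
          else
            ((pvBfsLoop f R C (R.toNat * C.toNat + 1) [(p.1, p.2)]
                (PySem.Set.add st.1 (p.1, p.2)) 0 0).1,
              st.2 ++ [((pvBfsLoop f R C (R.toNat * C.toNat + 1) [(p.1, p.2)]
                  (PySem.Set.add st.1 (p.1, p.2)) 0 0).2.1,
                (pvBfsLoop f R C (R.toNat * C.toNat + 1) [(p.1, p.2)]
                  (PySem.Set.add st.1 (p.1, p.2)) 0 0).2.2)])) (PySem.Set.empty, []) := by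
    unfold pvCells
    exact foldl_prod _ _
      (fun (st : PySem.Set (Int × Int) × List (Int × Int)) i j =>
        if (i, j) ∈ st.1 ∨ pvAt f i j = "#" then st
        else
          ((pvBfsLoop f R C (R.toNat * C.toNat + 1) [(i, j)]
              (PySem.Set.add st.1 (i, j)) 0 0).1,
            st.2 ++ [((pvBfsLoop f R C (R.toNat * C.toNat + 1) [(i, j)]
                (PySem.Set.add st.1 (i, j)) 0 0).2.1,
              (pvBfsLoop f R C (R.toNat * C.toNat + 1) [(i, j)]
                (PySem.Set.add st.1 (i, j)) 0 0).2.2)])) _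
  have hpair : pvBfs f R C =
      (((PySem.List.pyRange 0 R 1).foldl
        (fun st i => (PySem.List.pyRange 0 C 1).foldl
          (fun (st : PySem.Set (Int × Int) × List (Int × Int)) j =>
            if (i, j) ∈ st.1 ∨ pvAt f i j = "#" then st
            else
              ((pvBfsLoop f R C (R.toNat * C.toNat + 1) [(i, j)]
                  (PySem.Set.add st.1 (i, j)) 0 0).1,
                st.2 ++ [((pvBfsLoop f R C (R.toNat * C.toNat + 1) [(i, j)]
                    (PySem.Set.add st.1 (i, j)) 0 0).2.1,
                  (pvBfsLoop f R C (R.toNat * C.toNat + 1) [(i, j)]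
                    (PySem.Set.add st.1 (i, j)) 0 0).2.2)])) st) (PySem.Set.empty, [])).2.foldl
        (fun a p => if p.1 > p.2 then a + p.1 else a) 0,
       ((PySem.List.pyRange 0 R 1).foldl
        (fun st i => (PySem.List.pyRange 0 C 1).foldl
          (fun (st : PySem.Set (Int × Int) × List (Int × Int)) j =>
            if (i, j) ∈ st.1 ∨ pvAt f i j = "#" then st
            else
              ((pvBfsLoop f R C (R.toNat * C.toNat + 1) [(i, j)]
                  (PySem.Set.add st.1 (i, j)) 0 0).1,
                st.2 ++ [((pvBfsLoop f R C (R.toNat * C.toNat + 1) [(i, j)]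
                    (PySem.Set.add st.1 (i, j)) 0 0).2.1,
                  (pvBfsLoop f R C (R.toNat * C.toNat + 1) [(i, j)]
                    (PySem.Set.add st.1 (i, j)) 0 0).2.2)])) st) (PySem.Set.empty, [])).2.foldl
        (fun a p => if p.1 ≤ p.2 then a + p.2 else a) 0) := rfl
  rw [hpair, hstate, hinv.2]
  rfl

-- ---------- pass 3: per-root dictionaries group exactly the fibre counts ----------

def pvPred (f : List (List String)) (R C : Int) (a : Int × Int) (ch : (Int × Int) → Bool) :
    (Int × Int) → Bool :=
  fun q => decide (pvFree f R C q) && decide (pvRt f R C q = pvRt f R C a) && ch q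

def DItems (f : List (List String)) (R C : Int) (ch : (Int × Int) → Bool)
    (P : List (Int × Int)) : List (Int × Int) :=
  (P.filter (fun p => decide (pvAnchor f R C p))).map
    (fun a => (pvRt f R C a, (P.countP (pvPred f R C a ch) : Int)))

lemma anchors_filter_mem {f : List (List String)} {R C : Int} {P : List (Int × Int)}
    {a : Int × Int} (h : a ∈ P.filter (fun p => decide (pvAnchor f R C p))) :
    a ∈ P ∧ pvAnchor f R C a := by
  obtain ⟨h1, h2⟩ := List.mem_filter.1 h
  exact ⟨h1, of_decide_eq_true h2⟩

lemma keys_nodup_DItems {f : List (List String)} {R C : Int} {P : List (Int × Int)}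
    (hP : P.Nodup) (ch : (Int × Int) → Bool) :
    ((DItems f R C ch P).map (fun p => p.1)).Nodup := by
  unfold DItems
  rw [List.map_map]
  have : ((fun p : Int × Int => p.1) ∘
      (fun a => (pvRt f R C a, (P.countP (pvPred f R C a ch) : Int)))) =
      fun a => pvRt f R C a := rfl
  rw [this]
  refine List.Nodup.map_on ?_ (hP.filter _)
  intro a ha b hb hab
  exact anchor_unique (anchors_filter_mem ha).2 (anchors_filter_mem hb).2 hab

-- one dict update step, on a free cell
lemma DItems_step_free {f : List (List String)} {R C : Int} {P : List (Int × Int)}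
    {c : Int × Int} {rest : List (Int × Int)}
    (hsplit : pvCells R C = P ++ c :: rest) (hfc : pvFree f R C c)
    (ch : (Int × Int) → Bool) (d : PySem.Dict Int Int)
    (hd : d.items = DItems f R C ch P) :
    (d.insert (pvRt f R C c) (d.getD (pvRt f R C c) 0 +
        (if ch c = true then 1 else 0))).items = DItems f R C ch (P ++ [c]) := by
  have hcC : c ∈ pvCells R C := by
    rw [hsplit]
    exact List.mem_append_right _ List.mem_cons_self
  have hcin : pvInR R C c := mem_pvCells.1 hcC
  have hC : 0 < C := by
    obtain ⟨_, _, h3, h4⟩ := hcin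
    omega
  have hpw' := hsplit ▸ pvCells_pairwise R C hC
  obtain ⟨hpwP, hpwR, hcross⟩ := List.pairwise_append.1 hpw'
  have hPlt : ∀ q ∈ P, pvId C q < pvId C c := fun q hq =>
    hcross q hq c List.mem_cons_self
  have hltP : ∀ q ∈ pvCells R C, pvId C q < pvId C c → q ∈ P := by
    intro q hq hlt
    rw [hsplit] at hq
    rcases List.mem_append.1 hq with h' | h'
    · exact h'
    · rcases List.mem_cons.1 h' with rfl | h''
      · omega
      · have := (List.pairwise_cons.1 hpwR).1 q h''
        omega
  have hPnodup : P.Nodup := ((hsplit ▸ nodup_pvCells R C).of_append_left)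
  have hkeys : d.keys = (P.filter (fun p => decide (pvAnchor f R C p))).map
      (fun a => pvRt f R C a) := by
    show d.items.map (fun p => p.1) = _
    rw [hd]
    unfold DItems
    rw [List.map_map]
    rfl
  have hkeysnodup : d.keys.Nodup := by
    show (d.items.map (fun p => p.1)).Nodup
    rw [hd]
    exact keys_nodup_DItems hPnodup ch
  have hcountc : ∀ a : Int × Int, pvAnchor f R C a → pvRt f R C a ≠ pvRt f R C c →
      pvPred f R C a ch c = false := by
    intro a ha hne
    unfold pvPred
    have : decide (pvRt f R C c = pvRt f R C a) = false :=
      decide_eq_false (fun h => hne h.symm)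
    rw [this]
    simp
  by_cases hanc : pvAnchor f R C c
  · -- fresh key: the entry is appended
    have hnotmem : pvRt f R C c ∉ d.keys := by
      rw [hkeys]
      intro hmem
      obtain ⟨a, ha, heq⟩ := List.mem_map.1 hmem
      obtain ⟨haP, haA⟩ := anchors_filter_mem ha
      have : a = c := anchor_unique haA hanc heq
      subst this
      have := hPlt a haP
      omega
    have hcont : d.contains (pvRt f R C c) = false := by
      rw [PySem.Dict.contains_eq_decide_mem_keys]
      exact decide_eq_false hnotmem
    rw [PySem.Dict.items_insert_of_not_contains d _ hcont,
      PySem.Dict.getD_of_not_contains d 0 hcont, hd]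
    unfold DItems
    rw [List.filter_append, List.filter_cons, decide_eq_true hanc]
    simp only [if_true, List.filter_nil, List.map_append, List.map_cons, List.map_nil]
    congr 1
    · -- old entries keep their counts
      refine List.map_congr_left ?_
      intro a ha
      obtain ⟨haP, haA⟩ := anchors_filter_mem ha
      have hne : pvRt f R C a ≠ pvRt f R C c := by
        intro heq
        have : a = c := anchor_unique haA hanc heq
        subst this
        have := hPlt a haP
        omega
      rw [List.countP_append, List.countP_cons, List.countP_nil, hcountc a haA hne]
      simp
    · -- the new entry carries the count of c alone
      have hzero : P.countP (pvPred f R C c ch) = 0 := by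
        rw [List.countP_eq_zero]
        intro q hq
        unfold pvPred
        intro hqq
        simp only [Bool.and_eq_true, decide_eq_true_eq] at hqq
        obtain ⟨⟨hfq, hrt⟩, _⟩ := hqq
        have := hanc.2 q (by rw [hsplit]; exact List.mem_append_left _ hq) hfq hrt
        have := hPlt q hq
        omega
      have hcc : pvPred f R C c ch c = ch c := by
        unfold pvPred
        simp [hfc]
      rw [List.countP_append, List.countP_cons, List.countP_nil, hzero, hcc]
      cases hch : ch c <;> simp
  · -- existing key: the matching entry is bumped in place
    obtain ⟨a0, ha0A, hr0, hle0⟩ := anchor_exists (pvId C c).toNat c hfc (le_refl _)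
    have ha0ne : a0 ≠ c := fun h => hanc (h ▸ ha0A)
    have ha0lt : pvId C a0 < pvId C c := by
      have hne : pvId C a0 ≠ pvId C c := fun h => ha0ne (pvId_inj ha0A.1.1 hfc.1 h)
      omega
    have ha0P : a0 ∈ P := hltP a0 (mem_pvCells.2 ha0A.1.1) ha0lt
    have hrtc : pvRt f R C c = pvRt f R C a0 := (reach_sameRoot hr0).symm
    have ha0F : a0 ∈ P.filter (fun p => decide (pvAnchor f R C p)) :=
      List.mem_filter.2 ⟨ha0P, decide_eq_true ha0A⟩
    have hentry : (pvRt f R C a0, (P.countP (pvPred f R C a0 ch) : Int)) ∈ d.items := by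
      rw [hd]
      unfold DItems
      exact List.mem_map_of_mem ha0F
    have hgetD : d.getD (pvRt f R C c) 0 = (P.countP (pvPred f R C a0 ch) : Int) := by
      rw [hrtc]
      exact PySem.Dict.getD_of_mem_items d hentry hkeysnodup 0
    have hcont : d.contains (pvRt f R C c) = true := by
      rw [PySem.Dict.contains_eq_decide_mem_keys]
      refine decide_eq_true ?_
      rw [hkeys, hrtc]
      exact List.mem_map_of_mem ha0F
    rw [PySem.Dict.items_insert_of_contains d _ hcont, hd]
    unfold DItems
    rw [List.filter_append, List.filter_cons,
      decide_eq_false hanc]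
    simp only [Bool.false_eq_true, if_false, List.filter_nil, List.append_nil,
      List.map_map]
    refine List.map_congr_left ?_
    intro a ha
    obtain ⟨haP, haA⟩ := anchors_filter_mem ha
    simp only [Function.comp_apply]
    by_cases hae : pvRt f R C a = pvRt f R C c
    · have haa0 : a = a0 := anchor_unique haA ha0A (hae.trans hrtc)
      have hbeq : ((pvRt f R C a, (P.countP (pvPred f R C a ch) : Int)).1 ==
          pvRt f R C c) = true := by
        simp only [beq_iff_eq]
        exact hae
      rw [if_pos hbeq]
      have hcc : pvPred f R C a ch c = ch c := by
        unfold pvPred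
        have : decide (pvRt f R C c = pvRt f R C a) = true := decide_eq_true hae.symm
        simp [hfc, this]
      rw [List.countP_append, List.countP_cons, List.countP_nil, hcc]
      rw [hgetD, haa0]
      refine Prod.ext hrtc ?_
      dsimp only
      cases hch : ch c <;> simp <;> push_cast <;> omega
    · have hbeq : ((pvRt f R C a, (P.countP (pvPred f R C a ch) : Int)).1 ==
          pvRt f R C c) = false := by
        simp only [beq_eq_false_iff_ne, ne_eq]
        exact hae
      rw [if_neg (by rw [hbeq]; exact Bool.false_ne_true)]
      rw [List.countP_append, List.countP_cons, List.countP_nil,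
        hcountc a haA hae]
      simp

-- ---------- pass 3 invariant and the characterisation of B ----------

def DInv (f : List (List String)) (R C : Int) (P : List (Int × Int))
    (st : PySem.Dict Int Int × PySem.Dict Int Int) : Prop :=
  st.1.items = DItems f R C (isK f) P ∧ st.2.items = DItems f R C (isV f) P

lemma DItems_wall {f : List (List String)} {R C : Int} {P : List (Int × Int)}
    {c : Int × Int} (hwall : ¬ pvFree f R C c) (ch : (Int × Int) → Bool) :
    DItems f R C ch (P ++ [c]) = DItems f R C ch P := by
  unfold DItems
  rw [List.filter_append, List.filter_cons, decide_eq_false (fun hanc => hwall hanc.1)]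
  simp only [Bool.false_eq_true, if_false, List.filter_nil, List.append_nil]
  refine List.map_congr_left ?_
  intro a _
  rw [List.countP_append, List.countP_cons, List.countP_nil]
  have : pvPred f R C a ch c = false := by
    unfold pvPred
    rw [decide_eq_false hwall]
    simp
  rw [this]
  simp

lemma DInv_step {f : List (List String)} {R C : Int} {P : List (Int × Int)}
    {c : Int × Int} {rest : List (Int × Int)}
    (hsplit : pvCells R C = P ++ c :: rest)
    (st : PySem.Dict Int Int × PySem.Dict Int Int) (h : DInv f R C P st) :
    DInv f R C (P ++ [c])
      (if pvAt f c.1 c.2 = "#" then st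
       else
        (st.1.insert (PySem.List.pyGetD (ufResolve (ufUnions f R C) (max R 0 * max C 0)) (c.1 * C + c.2) 0)
          (st.1.getD (PySem.List.pyGetD (ufResolve (ufUnions f R C) (max R 0 * max C 0)) (c.1 * C + c.2) 0) 0 +
            (if pvAt f c.1 c.2 = "k" then 1 else 0)),
         st.2.insert (PySem.List.pyGetD (ufResolve (ufUnions f R C) (max R 0 * max C 0)) (c.1 * C + c.2) 0)
          (st.2.getD (PySem.List.pyGetD (ufResolve (ufUnions f R C) (max R 0 * max C 0)) (c.1 * C + c.2) 0) 0 +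
            (if pvAt f c.1 c.2 = "v" then 1 else 0)))) := by
  obtain ⟨h1, h2⟩ := h
  have hcC : c ∈ pvCells R C := by
    rw [hsplit]
    exact List.mem_append_right _ List.mem_cons_self
  have hcin : pvInR R C c := mem_pvCells.1 hcC
  by_cases hwall : pvAt f c.1 c.2 = "#"
  · rw [if_pos hwall]
    have hnf : ¬ pvFree f R C c := fun hf => hf.2 hwall
    exact ⟨by rw [h1, DItems_wall hnf], by rw [h2, DItems_wall hnf]⟩
  · rw [if_neg hwall]
    have hfc : pvFree f R C c := ⟨hcin, hwall⟩
    have hR : 0 < R := by obtain ⟨k1, k2, _, _⟩ := hcin; omega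
    have hC : 0 < C := by obtain ⟨_, _, k3, k4⟩ := hcin; omega
    have hmax : max R 0 * max C 0 = R * C := by
      rw [max_eq_left hR.le, max_eq_left hC.le]
    have hn : 0 ≤ R * C := by positivity
    have hrc : PySem.List.pyGetD (ufResolve (ufUnions f R C) (max R 0 * max C 0)) (c.1 * C + c.2) 0 =
        pvRt f R C c := by
      rw [hmax]
      have hb := (ufUnions_inv f R C hR hC).1
      have hbounds := pvId_bounds hcin
      exact ufResolve_spec hb hn (pvId C c) hbounds.1 hbounds.2
    rw [hrc]
    have hK : (if pvAt f c.1 c.2 = "k" then (1 : Int) else 0) =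
        (if isK f c = true then 1 else 0) := by
      simp [isK]
    have hV : (if pvAt f c.1 c.2 = "v" then (1 : Int) else 0) =
        (if isV f c = true then 1 else 0) := by
      simp [isV]
    rw [hK, hV]
    exact ⟨DItems_step_free hsplit hfc (isK f) st.1 h1,
      DItems_step_free hsplit hfc (isV f) st.2 h2⟩

-- ---------- pass 4: totalling the per-region summaries ----------

lemma sumS_shift : ∀ (l : List (Int × Int)) (a : Int),
    l.foldl (fun x p => if p.1 > p.2 then x + p.1 else x) a = a + sumS l := by
  intro l
  induction l with
  | nil => intro a; simp [sumS]
  | cons q l ih =>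
    intro a
    rw [List.foldl_cons]
    have hq : sumS (q :: l) = (if q.1 > q.2 then q.1 else 0) + sumS l := by
      show (q :: l).foldl (fun x p => if p.1 > p.2 then x + p.1 else x) 0 =
        (if q.1 > q.2 then q.1 else 0) + sumS l
      rw [List.foldl_cons, ih]
      split_ifs <;> omega
    rw [ih, hq]
    split_ifs <;> omega

lemma sumW_shift : ∀ (l : List (Int × Int)) (a : Int),
    l.foldl (fun x p => if p.1 ≤ p.2 then x + p.2 else x) a = a + sumW l := by
  intro l
  induction l with
  | nil => intro a; simp [sumW]
  | cons q l ih =>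
    intro a
    rw [List.foldl_cons]
    have hq : sumW (q :: l) = (if q.1 ≤ q.2 then q.2 else 0) + sumW l := by
      show (q :: l).foldl (fun x p => if p.1 ≤ p.2 then x + p.2 else x) 0 =
        (if q.1 ≤ q.2 then q.2 else 0) + sumW l
      rw [List.foldl_cons, ih]
      split_ifs <;> omega
    rw [ih, hq]
    split_ifs <;> omega

lemma fold_pair : ∀ (l : List (Int × Int)) (acc : Int × Int),
    l.foldl (fun acc p => if p.1 > p.2 then (acc.1 + p.1, acc.2) else (acc.1, acc.2 + p.2)) acc
      = (acc.1 + sumS l, acc.2 + sumW l) := by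
  intro l
  induction l with
  | nil => intro acc; simp [sumS, sumW]
  | cons q l ih =>
    intro acc
    rw [List.foldl_cons, ih]
    have hS : sumS (q :: l) = (if q.1 > q.2 then q.1 else 0) + sumS l := by
      show (q :: l).foldl (fun x p => if p.1 > p.2 then x + p.1 else x) 0 =
        (if q.1 > q.2 then q.1 else 0) + sumS l
      rw [List.foldl_cons, sumS_shift]
      split_ifs <;> omega
    have hW : sumW (q :: l) = (if q.1 ≤ q.2 then q.2 else 0) + sumW l := by
      show (q :: l).foldl (fun x p => if p.1 ≤ p.2 then x + p.2 else x) 0 =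
        (if q.1 ≤ q.2 then q.2 else 0) + sumW l
      rw [List.foldl_cons, sumW_shift]
      split_ifs <;> omega
    rw [hS, hW]
    by_cases hc : q.1 > q.2
    · rw [if_pos hc]
      simp only
      rw [if_pos hc, if_neg (by omega)]
      refine Prod.ext ?_ ?_ <;> simp <;> ring
    · rw [if_neg hc]
      simp only
      rw [if_neg hc, if_pos (by omega)]
      refine Prod.ext ?_ ?_ <;> simp <;> ring

-- ---------- B, characterised, and the main equivalence ----------

lemma alt_char (f : List (List String)) (R C : Int) :
    resolver_fazenda_alt f R C =
      (sumS ((pvAnchors f R C).map (fun a => (fibK f R C a, fibV f R C a))),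
       sumW ((pvAnchors f R C).map (fun a => (fibK f R C a, fibV f R C a)))) := by
  have hinit : DInv f R C [] (PySem.Dict.empty, PySem.Dict.empty) := ⟨rfl, rfl⟩
  have hinv := foldl_prefix_inv (pvCells R C)
    (fun (st : PySem.Dict Int Int × PySem.Dict Int Int) p =>
          if pvAt f p.1 p.2 = "#" then st
          else
            (st.1.insert (PySem.List.pyGetD (ufResolve (ufUnions f R C) (max R 0 * max C 0)) (p.1 * C + p.2) 0)
              (st.1.getD (PySem.List.pyGetD (ufResolve (ufUnions f R C) (max R 0 * max C 0)) (p.1 * C + p.2) 0) 0 +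
                (if pvAt f p.1 p.2 = "k" then 1 else 0)),
             st.2.insert (PySem.List.pyGetD (ufResolve (ufUnions f R C) (max R 0 * max C 0)) (p.1 * C + p.2) 0)
              (st.2.getD (PySem.List.pyGetD (ufResolve (ufUnions f R C) (max R 0 * max C 0)) (p.1 * C + p.2) 0) 0 +
                (if pvAt f p.1 p.2 = "v" then 1 else 0))))
    (DInv f R C)
    (fun P c rest hs st h => DInv_step hs st h)
    (PySem.Dict.empty, PySem.Dict.empty) hinit
  have hstate : (PySem.List.pyRange 0 R 1).foldl
      (fun st i => (PySem.List.pyRange 0 C 1).foldl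
        (fun (st : PySem.Dict Int Int × PySem.Dict Int Int) j =>
          if pvAt f i j = "#" then st
          else
            (st.1.insert (PySem.List.pyGetD (ufResolve (ufUnions f R C) (max R 0 * max C 0)) (i * C + j) 0)
              (st.1.getD (PySem.List.pyGetD (ufResolve (ufUnions f R C) (max R 0 * max C 0)) (i * C + j) 0) 0 +
                (if pvAt f i j = "k" then 1 else 0)),
             st.2.insert (PySem.List.pyGetD (ufResolve (ufUnions f R C) (max R 0 * max C 0)) (i * C + j) 0)
              (st.2.getD (PySem.List.pyGetD (ufResolve (ufUnions f R C) (max R 0 * max C 0)) (i * C + j) 0) 0 +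
                (if pvAt f i j = "v" then 1 else 0)))) st) (PySem.Dict.empty, PySem.Dict.empty) =
      (pvCells R C).foldl
        (fun (st : PySem.Dict Int Int × PySem.Dict Int Int) p =>
          if pvAt f p.1 p.2 = "#" then st
          else
            (st.1.insert (PySem.List.pyGetD (ufResolve (ufUnions f R C) (max R 0 * max C 0)) (p.1 * C + p.2) 0)
              (st.1.getD (PySem.List.pyGetD (ufResolve (ufUnions f R C) (max R 0 * max C 0)) (p.1 * C + p.2) 0) 0 +
                (if pvAt f p.1 p.2 = "k" then 1 else 0)),
             st.2.insert (PySem.List.pyGetD (ufResolve (ufUnions f R C) (max R 0 * max C 0)) (p.1 * C + p.2) 0)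
              (st.2.getD (PySem.List.pyGetD (ufResolve (ufUnions f R C) (max R 0 * max C 0)) (p.1 * C + p.2) 0) 0 +
                (if pvAt f p.1 p.2 = "v" then 1 else 0)))) (PySem.Dict.empty, PySem.Dict.empty) := by
    unfold pvCells
    exact foldl_prod _ _
      (fun (st : PySem.Dict Int Int × PySem.Dict Int Int) i j =>
          if pvAt f i j = "#" then st
          else
            (st.1.insert (PySem.List.pyGetD (ufResolve (ufUnions f R C) (max R 0 * max C 0)) (i * C + j) 0)
              (st.1.getD (PySem.List.pyGetD (ufResolve (ufUnions f R C) (max R 0 * max C 0)) (i * C + j) 0) 0 +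
                (if pvAt f i j = "k" then 1 else 0)),
             st.2.insert (PySem.List.pyGetD (ufResolve (ufUnions f R C) (max R 0 * max C 0)) (i * C + j) 0)
              (st.2.getD (PySem.List.pyGetD (ufResolve (ufUnions f R C) (max R 0 * max C 0)) (i * C + j) 0) 0 +
                (if pvAt f i j = "v" then 1 else 0)))) _
  have hpair : resolver_fazenda_alt f R C =
      ((PySem.List.pyRange 0 R 1).foldl
      (fun st i => (PySem.List.pyRange 0 C 1).foldl
        (fun (st : PySem.Dict Int Int × PySem.Dict Int Int) j =>
          if pvAt f i j = "#" then st
          else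
            (st.1.insert (PySem.List.pyGetD (ufResolve (ufUnions f R C) (max R 0 * max C 0)) (i * C + j) 0)
              (st.1.getD (PySem.List.pyGetD (ufResolve (ufUnions f R C) (max R 0 * max C 0)) (i * C + j) 0) 0 +
                (if pvAt f i j = "k" then 1 else 0)),
             st.2.insert (PySem.List.pyGetD (ufResolve (ufUnions f R C) (max R 0 * max C 0)) (i * C + j) 0)
              (st.2.getD (PySem.List.pyGetD (ufResolve (ufUnions f R C) (max R 0 * max C 0)) (i * C + j) 0) 0 +
                (if pvAt f i j = "v" then 1 else 0)))) st) (PySem.Dict.empty, PySem.Dict.empty)).1.items.foldl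
        (fun (acc : Int × Int) (p : Int × Int) =>
          if p.2 > ((PySem.List.pyRange 0 R 1).foldl
      (fun st i => (PySem.List.pyRange 0 C 1).foldl
        (fun (st : PySem.Dict Int Int × PySem.Dict Int Int) j =>
          if pvAt f i j = "#" then st
          else
            (st.1.insert (PySem.List.pyGetD (ufResolve (ufUnions f R C) (max R 0 * max C 0)) (i * C + j) 0)
              (st.1.getD (PySem.List.pyGetD (ufResolve (ufUnions f R C) (max R 0 * max C 0)) (i * C + j) 0) 0 +
                (if pvAt f i j = "k" then 1 else 0)),
             st.2.insert (PySem.List.pyGetD (ufResolve (ufUnions f R C) (max R 0 * max C 0)) (i * C + j) 0)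
              (st.2.getD (PySem.List.pyGetD (ufResolve (ufUnions f R C) (max R 0 * max C 0)) (i * C + j) 0) 0 +
                (if pvAt f i j = "v" then 1 else 0)))) st) (PySem.Dict.empty, PySem.Dict.empty)).2.getD p.1 0 then (acc.1 + p.2, acc.2)
          else (acc.1, acc.2 + ((PySem.List.pyRange 0 R 1).foldl
      (fun st i => (PySem.List.pyRange 0 C 1).foldl
        (fun (st : PySem.Dict Int Int × PySem.Dict Int Int) j =>
          if pvAt f i j = "#" then st
          else
            (st.1.insert (PySem.List.pyGetD (ufResolve (ufUnions f R C) (max R 0 * max C 0)) (i * C + j) 0)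
              (st.1.getD (PySem.List.pyGetD (ufResolve (ufUnions f R C) (max R 0 * max C 0)) (i * C + j) 0) 0 +
                (if pvAt f i j = "k" then 1 else 0)),
             st.2.insert (PySem.List.pyGetD (ufResolve (ufUnions f R C) (max R 0 * max C 0)) (i * C + j) 0)
              (st.2.getD (PySem.List.pyGetD (ufResolve (ufUnions f R C) (max R 0 * max C 0)) (i * C + j) 0) 0 +
                (if pvAt f i j = "v" then 1 else 0)))) st) (PySem.Dict.empty, PySem.Dict.empty)).2.getD p.1 0)) (0, 0) := rfl
  rw [hpair, hstate]
  have hIK : ((pvCells R C).foldl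
        (fun (st : PySem.Dict Int Int × PySem.Dict Int Int) p =>
          if pvAt f p.1 p.2 = "#" then st
          else
            (st.1.insert (PySem.List.pyGetD (ufResolve (ufUnions f R C) (max R 0 * max C 0)) (p.1 * C + p.2) 0)
              (st.1.getD (PySem.List.pyGetD (ufResolve (ufUnions f R C) (max R 0 * max C 0)) (p.1 * C + p.2) 0) 0 +
                (if pvAt f p.1 p.2 = "k" then 1 else 0)),
             st.2.insert (PySem.List.pyGetD (ufResolve (ufUnions f R C) (max R 0 * max C 0)) (p.1 * C + p.2) 0)
              (st.2.getD (PySem.List.pyGetD (ufResolve (ufUnions f R C) (max R 0 * max C 0)) (p.1 * C + p.2) 0) 0 +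
                (if pvAt f p.1 p.2 = "v" then 1 else 0)))) (PySem.Dict.empty, PySem.Dict.empty)).1.items =
      (pvAnchors f R C).map (fun a => (pvRt f R C a, fibK f R C a)) := hinv.1
  have hIV : ((pvCells R C).foldl
        (fun (st : PySem.Dict Int Int × PySem.Dict Int Int) p =>
          if pvAt f p.1 p.2 = "#" then st
          else
            (st.1.insert (PySem.List.pyGetD (ufResolve (ufUnions f R C) (max R 0 * max C 0)) (p.1 * C + p.2) 0)
              (st.1.getD (PySem.List.pyGetD (ufResolve (ufUnions f R C) (max R 0 * max C 0)) (p.1 * C + p.2) 0) 0 +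
                (if pvAt f p.1 p.2 = "k" then 1 else 0)),
             st.2.insert (PySem.List.pyGetD (ufResolve (ufUnions f R C) (max R 0 * max C 0)) (p.1 * C + p.2) 0)
              (st.2.getD (PySem.List.pyGetD (ufResolve (ufUnions f R C) (max R 0 * max C 0)) (p.1 * C + p.2) 0) 0 +
                (if pvAt f p.1 p.2 = "v" then 1 else 0)))) (PySem.Dict.empty, PySem.Dict.empty)).2.items =
      (pvAnchors f R C).map (fun a => (pvRt f R C a, fibV f R C a)) := hinv.2
  have hgetV : ∀ a ∈ pvAnchors f R C,
      ((pvCells R C).foldl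
        (fun (st : PySem.Dict Int Int × PySem.Dict Int Int) p =>
          if pvAt f p.1 p.2 = "#" then st
          else
            (st.1.insert (PySem.List.pyGetD (ufResolve (ufUnions f R C) (max R 0 * max C 0)) (p.1 * C + p.2) 0)
              (st.1.getD (PySem.List.pyGetD (ufResolve (ufUnions f R C) (max R 0 * max C 0)) (p.1 * C + p.2) 0) 0 +
                (if pvAt f p.1 p.2 = "k" then 1 else 0)),
             st.2.insert (PySem.List.pyGetD (ufResolve (ufUnions f R C) (max R 0 * max C 0)) (p.1 * C + p.2) 0)
              (st.2.getD (PySem.List.pyGetD (ufResolve (ufUnions f R C) (max R 0 * max C 0)) (p.1 * C + p.2) 0) 0 +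
                (if pvAt f p.1 p.2 = "v" then 1 else 0)))) (PySem.Dict.empty, PySem.Dict.empty)).2.getD (pvRt f R C a) 0 = fibV f R C a := by
    intro a ha
    have hentry : (pvRt f R C a, fibV f R C a) ∈
        ((pvCells R C).foldl
        (fun (st : PySem.Dict Int Int × PySem.Dict Int Int) p =>
          if pvAt f p.1 p.2 = "#" then st
          else
            (st.1.insert (PySem.List.pyGetD (ufResolve (ufUnions f R C) (max R 0 * max C 0)) (p.1 * C + p.2) 0)
              (st.1.getD (PySem.List.pyGetD (ufResolve (ufUnions f R C) (max R 0 * max C 0)) (p.1 * C + p.2) 0) 0 +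
                (if pvAt f p.1 p.2 = "k" then 1 else 0)),
             st.2.insert (PySem.List.pyGetD (ufResolve (ufUnions f R C) (max R 0 * max C 0)) (p.1 * C + p.2) 0)
              (st.2.getD (PySem.List.pyGetD (ufResolve (ufUnions f R C) (max R 0 * max C 0)) (p.1 * C + p.2) 0) 0 +
                (if pvAt f p.1 p.2 = "v" then 1 else 0)))) (PySem.Dict.empty, PySem.Dict.empty)).2.items := by
      rw [hIV]
      exact List.mem_map_of_mem ha
    have hnd : ((pvCells R C).foldl
        (fun (st : PySem.Dict Int Int × PySem.Dict Int Int) p =>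
          if pvAt f p.1 p.2 = "#" then st
          else
            (st.1.insert (PySem.List.pyGetD (ufResolve (ufUnions f R C) (max R 0 * max C 0)) (p.1 * C + p.2) 0)
              (st.1.getD (PySem.List.pyGetD (ufResolve (ufUnions f R C) (max R 0 * max C 0)) (p.1 * C + p.2) 0) 0 +
                (if pvAt f p.1 p.2 = "k" then 1 else 0)),
             st.2.insert (PySem.List.pyGetD (ufResolve (ufUnions f R C) (max R 0 * max C 0)) (p.1 * C + p.2) 0)
              (st.2.getD (PySem.List.pyGetD (ufResolve (ufUnions f R C) (max R 0 * max C 0)) (p.1 * C + p.2) 0) 0 +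
                (if pvAt f p.1 p.2 = "v" then 1 else 0)))) (PySem.Dict.empty, PySem.Dict.empty)).2.keys.Nodup := by
      show ((((pvCells R C).foldl
        (fun (st : PySem.Dict Int Int × PySem.Dict Int Int) p =>
          if pvAt f p.1 p.2 = "#" then st
          else
            (st.1.insert (PySem.List.pyGetD (ufResolve (ufUnions f R C) (max R 0 * max C 0)) (p.1 * C + p.2) 0)
              (st.1.getD (PySem.List.pyGetD (ufResolve (ufUnions f R C) (max R 0 * max C 0)) (p.1 * C + p.2) 0) 0 +
                (if pvAt f p.1 p.2 = "k" then 1 else 0)),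
             st.2.insert (PySem.List.pyGetD (ufResolve (ufUnions f R C) (max R 0 * max C 0)) (p.1 * C + p.2) 0)
              (st.2.getD (PySem.List.pyGetD (ufResolve (ufUnions f R C) (max R 0 * max C 0)) (p.1 * C + p.2) 0) 0 +
                (if pvAt f p.1 p.2 = "v" then 1 else 0)))) (PySem.Dict.empty, PySem.Dict.empty)).2.items).map (fun p => p.1)).Nodup
      rw [hinv.2]
      exact keys_nodup_DItems (nodup_pvCells R C) (isV f)
    exact PySem.Dict.getD_of_mem_items _ hentry hnd 0
  rw [hIK, List.foldl_map]
  rw [PySem.List.foldl_congr_mem _ _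
    (fun (acc : Int × Int) a => if fibK f R C a > fibV f R C a
      then (acc.1 + fibK f R C a, acc.2) else (acc.1, acc.2 + fibV f R C a)) _
    (by
      intro acc a ha
      dsimp only
      rw [hgetV a ha])]
  have h1 : ((pvAnchors f R C).map (fun a => (fibK f R C a, fibV f R C a))).foldl
      (fun (acc : Int × Int) (p : Int × Int) =>
        if p.1 > p.2 then (acc.1 + p.1, acc.2) else (acc.1, acc.2 + p.2)) (0, 0) =
      (pvAnchors f R C).foldl
        (fun (acc : Int × Int) a => if fibK f R C a > fibV f R C a
          then (acc.1 + fibK f R C a, acc.2) else (acc.1, acc.2 + fibV f R C a)) (0, 0) :=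
    List.foldl_map
  rw [← h1, fold_pair]
  simp

theorem pv_mainB : ∀ (fazenda : List (List String)) (R : Int) (C : Int),
    pvBfs fazenda R C = resolver_fazenda_alt fazenda R C := by
  intro f R C
  rw [pvBfs_char, alt_char]

theorem pv_main : ∀ (fazenda : List (List String)) (R : Int) (C : Int),
    resolver_fazenda fazenda R C = resolver_fazenda_alt fazenda R C := by
  intro f R C
  rw [pv_mainA, pv_mainB]


-- ===== VERDICT (by name: the statement is the Claim_ definition above) =====
theorem resolver_fazenda_spec : Claim_equal_resolver_fazenda := by
  intro fazenda R C _ _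
  unfold Spec_resolver_fazenda
  exact pv_main fazenda R C
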